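-- pv_equiv track=rewrite | github.com/newkimjiwon/CodingTest | BAEKJOON/S1/1926번_그림.py | solution
-- ===== SOURCE A (Python) =====
-- from collections import deque
--
-- def solution(n, m, images):
--     count, max_value = 0, 0
--
--     move = [(0, 1), (0, -1), (1, 0), (-1, 0)]  # 상하좌우
--     visited = [[False] * m for _ in range(n)]  # 방문 처리 배열
--
--     for i in range(n):
--         for ii in range(m):
--             if images[i][ii] == 1 and not visited[i][ii]:
--                 count += 1
--                 visited[i][ii] = True
--
--                 dq = deque([(i, ii)])  # 시작
--                 current = 1
--
--                 while dq:
--                     ny, nx = dq.popleft()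
--
--                     for iy, ix in move:
--                         y = ny + iy
--                         x = nx + ix
--
--                         if 0 <= y < n and 0 <= x < m:
--                             if images[y][x] == 1 and not visited[y][x]:
--                                 current += 1
--                                 dq.append((y, x))
--                                 visited[y][x] = True
--
--                 max_value = max(max_value, current)
--
--     return count, max_value
-- ===== SOURCE B (Python) =====
-- def solution(n, m, images):
--     # Disjoint-set union over cell indices i*m+j: union each 1-cell with its
--     # right and down 1-neighbours (attaching the larger root to the smaller),
--     # then tally component sizes per root.
--     parent = {}
--     for i in range(n):
--         for j in range(m):
--             if images[i][j] == 1: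
--                 parent[i * m + j] = i * m + j
--
--     def find(x):
--         while parent[x] != x:
--             x = parent[x]
--         return x
--
--     for i in range(n):
--         for j in range(m):
--             if images[i][j] == 1:
--                 if i + 1 < n and images[i + 1][j] == 1:
--                     ra, rb = find(i * m + j), find((i + 1) * m + j)
--                     if ra < rb:
--                         parent[rb] = ra
--                     elif rb < ra:
--                         parent[ra] = rb
--                 if j + 1 < m and images[i][j + 1] == 1:
--                     ra, rb = find(i * m + j), find(i * m + j + 1)
--                     if ra < rb:
--                         parent[rb] = ra
--                     elif rb < ra:
--                         parent[ra] = rb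
--
--     sizes = {}
--     for i in range(n):
--         for j in range(m):
--             if images[i][j] == 1:
--                 r = find(i * m + j)
--                 sizes[r] = sizes.get(r, 0) + 1
--
--     return (len(sizes), max(sizes.values(), default=0))
-- ===== Notes on version B (the rewrite author's own statement) =====
-- stated objective: alternative
-- what changed: Per-component BFS flood fill with a visited matrix and inline count/max updates is replaced by a disjoint-set union (union-find) over cell indices i*m+j: one pass unions each 1-cell with its right/down 1-neighbours (attaching the larger root to the smaller), then a tally pass maps each 1-cell to its root in a root->size dict; the answer is (number of keys, max value).
import Mathlib
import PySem

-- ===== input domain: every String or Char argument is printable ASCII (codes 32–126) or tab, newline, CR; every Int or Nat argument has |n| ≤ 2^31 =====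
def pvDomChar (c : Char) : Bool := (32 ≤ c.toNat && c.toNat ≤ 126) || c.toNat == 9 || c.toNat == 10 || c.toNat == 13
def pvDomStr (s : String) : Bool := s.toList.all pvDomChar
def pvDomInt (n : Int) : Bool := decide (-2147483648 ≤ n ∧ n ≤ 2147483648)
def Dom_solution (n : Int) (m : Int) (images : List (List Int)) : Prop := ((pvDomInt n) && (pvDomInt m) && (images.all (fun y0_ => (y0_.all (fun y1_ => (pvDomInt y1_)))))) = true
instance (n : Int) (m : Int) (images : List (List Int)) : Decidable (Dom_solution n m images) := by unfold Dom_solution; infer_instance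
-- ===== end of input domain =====

-- B replaces A's per-component BFS flood fill (deque + visited matrix + inline count/max updates)
-- by a disjoint-set union over cell indices i*m+j (union right/down neighbours, larger root under
-- smaller, then one tally pass root -> size); same (count, max) value, alternative algorithm.

-- ===== PORT A =====
-- images[y][x] (always guarded in range by A's loops inside Pre_)
def imgA (images : List (List Int)) (y x : Int) : Int :=
  PySem.List.pyGetD (PySem.List.pyGetD images y []) x 0

-- visited[y][x] (reads/writes only happen at 0 ≤ y < n, 0 ≤ x < m, where toNat is exact)
def mget (v : List (List Bool)) (y x : Int) : Bool :=
  PySem.List.pyGetD (PySem.List.pyGetD v y []) x false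

def mset (v : List (List Bool)) (y x : Int) : List (List Bool) :=
  v.modify y.toNat (fun row => row.set x.toNat true)

def moveA : List (Int × Int) := [(0, 1), (0, -1), (1, 0), (-1, 0)]

-- the `while dq:` BFS loop; fuel n*m+1 bounds the number of pops (proved below)
def bfsA (n m : Int) (images : List (List Int)) :
    Nat → List (Int × Int) → List (List Bool) → Int → List (List Bool) × Int
  | 0, _, visited, current => (visited, current)
  | _ + 1, [], visited, current => (visited, current)
  | fuel + 1, c :: dq, visited, current =>
      let st := moveA.foldl
        (fun (st : List (Int × Int) × List (List Bool) × Int) d =>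
          let y := c.1 + d.1
          let x := c.2 + d.2
          if 0 ≤ y ∧ y < n ∧ 0 ≤ x ∧ x < m then
            if imgA images y x = 1 ∧ mget st.2.1 y x = false then
              (st.1 ++ [(y, x)], mset st.2.1 y x, st.2.2 + 1)
            else st
          else st)
        (dq, visited, current)
      bfsA n m images fuel st.1 st.2.1 st.2.2

def solution (n : Int) (m : Int) (images : List (List Int)) : Int × Int :=
  let visited0 := List.replicate n.toNat (List.replicate m.toNat false)
  let r := (PySem.List.pyRange 0 n 1).foldl (fun st i =>
      (PySem.List.pyRange 0 m 1).foldl (fun (st : Int × Int × List (List Bool)) ii =>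
        if imgA images i ii = 1 ∧ mget st.2.2 i ii = false then
          let visited := mset st.2.2 i ii
          let res := bfsA n m images (n.toNat * m.toNat + 1) [(i, ii)] visited 1
          (st.1 + 1, max st.2.1 res.2, res.1)
        else st) st)
    ((0 : Int), (0 : Int), visited0)
  (r.1, r.2.1)

-- ===== PORT B =====
-- the `while parent[x] != x:` loop of find; fuel n*m+1 bounds the parent chain (proved below).
-- On a missing key Python raises KeyError; that branch is unreachable on Pre_ inputs.
def findB (parent : PySem.Dict Int Int) : Nat → Int → Int
  | 0, x => x
  | f + 1, x =>
    match parent.get? x with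
    | none => x
    | some p => if p = x then x else findB parent f p

def fuelB (n m : Int) : Nat := n.toNat * m.toNat + 1

-- if ra < rb: parent[rb] = ra / elif rb < ra: parent[ra] = rb
def unionB (parent : PySem.Dict Int Int) (ra rb : Int) : PySem.Dict Int Int :=
  if ra < rb then parent.insert rb ra
  else if rb < ra then parent.insert ra rb
  else parent

-- first pass: parent[i*m+j] = i*m+j for every 1-cell
def initParent (n m : Int) (images : List (List Int)) : PySem.Dict Int Int :=
  (PySem.List.pyRange 0 n 1).foldl (fun d i =>
    (PySem.List.pyRange 0 m 1).foldl (fun (d : PySem.Dict Int Int) j =>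
      if imgA images i j = 1 then d.insert (i * m + j) (i * m + j) else d) d) PySem.Dict.empty

-- second pass: union each 1-cell with its right and down 1-neighbours
def unionScan (n m : Int) (images : List (List Int)) (p0 : PySem.Dict Int Int) : PySem.Dict Int Int :=
  (PySem.List.pyRange 0 n 1).foldl (fun d i =>
    (PySem.List.pyRange 0 m 1).foldl (fun (d : PySem.Dict Int Int) j =>
      if imgA images i j = 1 then
        let d1 := if i + 1 < n ∧ imgA images (i + 1) j = 1 then
            unionB d (findB d (fuelB n m) (i * m + j)) (findB d (fuelB n m) ((i + 1) * m + j)) else d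
        if j + 1 < m ∧ imgA images i (j + 1) = 1 then
            unionB d1 (findB d1 (fuelB n m) (i * m + j)) (findB d1 (fuelB n m) (i * m + j + 1)) else d1
      else d) d) p0

-- third pass: sizes[find(i*m+j)] += 1 for every 1-cell
def tallyB (n m : Int) (images : List (List Int)) (parent : PySem.Dict Int Int) : PySem.Dict Int Int :=
  (PySem.List.pyRange 0 n 1).foldl (fun s i =>
    (PySem.List.pyRange 0 m 1).foldl (fun (s : PySem.Dict Int Int) j =>
      if imgA images i j = 1 then
        s.insert (findB parent (fuelB n m) (i * m + j))
          (s.getD (findB parent (fuelB n m) (i * m + j)) 0 + 1)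
      else s) s) PySem.Dict.empty

def solution_alt (n : Int) (m : Int) (images : List (List Int)) : Int × Int :=
  let parent := unionScan n m images (initParent n m images)
  let sizes := tallyB n m images parent
  ((sizes.size : Int), PySem.List.maxD sizes.values (fun x => x) 0)

-- ===== PRECONDITION & SPEC =====
-- Pre_ excludes exactly the inputs where A raises IndexError: when n > 0 and m > 0 the scan reads
-- images[i][j] for every 0 ≤ i < n, 0 ≤ j < m, so images needs ≥ n rows whose first n each have ≥ m entries.
def Pre_solution (n : Int) (m : Int) (images : List (List Int)) : Prop :=
  0 < n → 0 < m → n ≤ images.length ∧ ∀ row ∈ images.take n.toNat, m ≤ row.length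
instance (n : Int) (m : Int) (images : List (List Int)) : Decidable (Pre_solution n m images) := by
  unfold Pre_solution; infer_instance

def pvWitness_solution : Int × Int × List (List Int) := (2, 3, [[1, 0, 1], [1, 1, 0]])

def Spec_solution (n : Int) (m : Int) (images : List (List Int)) (out : Int × Int) : Prop := out = solution_alt n m images
instance (n : Int) (m : Int) (images : List (List Int)) (out : Int × Int) : Decidable (Spec_solution n m images out) := by unfold Spec_solution; infer_instance

-- ===== CLAIM (what is proved, stated in full; the proofs are below) =====
def Claim_equal_solution : Prop := ∀ (n : Int) (m : Int) (images : List (List Int)), Dom_solution n m images → Pre_solution n m images → Spec_solution n m images (solution n m images)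

-- ===== LEMMAS AND PROOFS =====

-- ---------- abstract cells / adjacency / components ----------
def inbC (n m : Int) (c : Int × Int) : Prop := 0 ≤ c.1 ∧ c.1 < n ∧ 0 ≤ c.2 ∧ c.2 < m
def okC (n m : Int) (val : Int × Int → Int) (c : Int × Int) : Prop := inbC n m c ∧ val c = 1
def edgeC (n m : Int) (val : Int × Int → Int) (c c' : Int × Int) : Prop :=
  okC n m val c ∧ okC n m val c' ∧ (c'.1 - c.1, c'.2 - c.2) ∈ moveA
def reachC (n m : Int) (val : Int × Int → Int) (s c : Int × Int) : Prop :=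
  Relation.ReflTransGen (edgeC n m val) s c
noncomputable def gridC (n m : Int) : Finset (Int × Int) := Finset.Icc 0 (n - 1) ×ˢ Finset.Icc 0 (m - 1)
noncomputable def compC (n m : Int) (val : Int × Int → Int) (s : Int × Int) : Finset (Int × Int) :=
  @Finset.filter _ (fun c => reachC n m val s c) (Classical.decPred _) (gridC n m)
def valF (images : List (List Int)) : Int × Int → Int := fun c => imgA images c.1 c.2

-- the shape both programs are reduced to: a duplicate-free list of the components
def CharL (n m : Int) (val : Int × Int → Int) (out : Int × Int) : Prop :=
  ∃ L : List (Finset (Int × Int)), L.Nodup ∧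
    (∀ K, K ∈ L ↔ ∃ c, okC n m val c ∧ K = compC n m val c) ∧
    out = ((L.length : Int), (L.map (fun K => (K.card : Int))).foldl max 0)

-- ---------- generic worklist search (A's BFS instantiates it) ----------
def gLoop {σ : Type} (memv : σ → Int × Int → Bool) (markv : σ → Int × Int → σ)
    (pop : List (Int × Int) → Option ((Int × Int) × List (Int × Int)))
    (n m : Int) (val : Int × Int → Int) (moves : List (Int × Int)) :
    Nat → List (Int × Int) → σ → Int → σ × Int
  | 0, _, v, cnt => (v, cnt)
  | fuel + 1, p, v, cnt =>
    match pop p with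
    | none => (v, cnt)
    | some (c, rest) =>
      let st := moves.foldl
        (fun (st : List (Int × Int) × σ × Int) d =>
          let y := c.1 + d.1
          let x := c.2 + d.2
          if 0 ≤ y ∧ y < n ∧ 0 ≤ x ∧ x < m ∧ val (y, x) = 1 ∧ memv st.2.1 (y, x) = false then
            (st.1 ++ [(y, x)], markv st.2.1 (y, x), st.2.2 + 1)
          else st)
        (rest, v, cnt)
      gLoop memv markv pop n m val moves fuel st.1 st.2.1 st.2.2

def popA (p : List (Int × Int)) : Option ((Int × Int) × List (Int × Int)) :=
  match p with
  | [] => none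
  | c :: rest => some (c, rest)

def memA (v : List (List Bool)) (c : Int × Int) : Bool := mget v c.1 c.2
def markA (v : List (List Bool)) (c : Int × Int) : List (List Bool) := mset v c.1 c.2
def WfA (n m : Int) (v : List (List Bool)) : Prop :=
  v.length = n.toNat ∧ ∀ row ∈ v, row.length = m.toNat

structure GHyp {σ : Type} (n m : Int) (val : Int × Int → Int)
    (memv : σ → Int × Int → Bool) (markv : σ → Int × Int → σ) (Wf : σ → Prop)
    (pop : List (Int × Int) → Option ((Int × Int) × List (Int × Int)))
    (moves : List (Int × Int)) : Prop where
  mem_mark : ∀ v c c', Wf v → inbC n m c → inbC n m c' →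
      (memv (markv v c) c' = true ↔ c' = c ∨ memv v c' = true)
  wf_mark : ∀ v c, Wf v → inbC n m c → Wf (markv v c)
  pop_some : ∀ p c rest, pop p = some (c, rest) → p.Perm (c :: rest)
  pop_none : ∀ p, pop p = none → p = []
  moves_perm : moves.Perm moveA

structure GInv {σ : Type} (n m : Int) (val : Int × Int → Int)
    (memv : σ → Int × Int → Bool) (Wf : σ → Prop) (v0 : σ) (s : Int × Int) (cnt0 : Int)
    (p : List (Int × Int)) (v : σ) (cnt : Int) (F : Finset (Int × Int)) : Prop where
  wf : Wf v
  nodup : p.Nodup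
  mem_iff : ∀ c, inbC n m c → (memv v c = true ↔ c ∈ F ∨ memv v0 c = true)
  F_reach : ∀ c ∈ F, reachC n m val s c ∧ memv v0 c = false
  p_sub : ∀ c ∈ p, c ∈ F
  closed : ∀ c ∈ F, c ∉ p → ∀ c', edgeC n m val c c' → memv v c' = true
  s_mem : s ∈ F
  cnt_eq : cnt = cnt0 + F.card

theorem reach_ok (n m : Int) (val : Int × Int → Int) (s c : Int × Int)
    (hs : okC n m val s) (h : reachC n m val s c) : okC n m val c := by
  induction h with
  | refl => exact hs
  | tail _ h2 _ => exact h2.2.1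

theorem mem_gridC (n m : Int) (c : Int × Int) : c ∈ gridC n m ↔ inbC n m c := by
  simp only [gridC, Finset.mem_product, Finset.mem_Icc, inbC]
  omega

theorem ok_mem_grid (n m : Int) (val : Int × Int → Int) (c : Int × Int)
    (h : okC n m val c) : c ∈ gridC n m := (mem_gridC n m c).mpr h.1

theorem card_gridC (n m : Int) : (gridC n m).card = n.toNat * m.toNat := by
  have h1 : (n - 1 + 1 - 0) = n := by ring
  have h2 : (m - 1 + 1 - 0) = m := by ring
  simp only [gridC, Finset.card_product, Int.card_Icc, h1, h2]

theorem mem_compC (n m : Int) (val : Int × Int → Int) (s c : Int × Int) :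
    c ∈ compC n m val s ↔ inbC n m c ∧ reachC n m val s c := by
  unfold compC
  rw [@Finset.mem_filter _ _ (Classical.decPred _), mem_gridC]

theorem edge_symm (n m : Int) (val : Int × Int → Int) (c c' : Int × Int)
    (h : edgeC n m val c c') : edgeC n m val c' c := by
  obtain ⟨h1, h2, h3⟩ := h
  refine ⟨h2, h1, ?_⟩
  simp only [moveA, List.mem_cons, Prod.mk.injEq,
    List.not_mem_nil, or_false] at h3 ⊢
  omega

theorem reach_symm (n m : Int) (val : Int × Int → Int) (s c : Int × Int)
    (h : reachC n m val s c) : reachC n m val c s := by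
  induction h with
  | refl => exact Relation.ReflTransGen.refl
  | tail _ h2 ih => exact Relation.ReflTransGen.head (edge_symm n m val _ _ h2) ih

theorem reach_trans (n m : Int) (val : Int × Int → Int) (a b c : Int × Int)
    (h1 : reachC n m val a b) (h2 : reachC n m val b c) : reachC n m val a c :=
  Relation.ReflTransGen.trans h1 h2

theorem comp_congr (n m : Int) (val : Int × Int → Int) (s t : Int × Int)
    (h : reachC n m val s t) : compC n m val s = compC n m val t := by
  apply Finset.ext
  intro c
  rw [mem_compC, mem_compC]
  constructor
  · rintro ⟨hc, hr⟩
    exact ⟨hc, reach_trans n m val _ _ _ (reach_symm n m val _ _ h) hr⟩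
  · rintro ⟨hc, hr⟩
    exact ⟨hc, reach_trans n m val _ _ _ h hr⟩

theorem self_mem_comp (n m : Int) (val : Int × Int → Int) (s : Int × Int)
    (h : okC n m val s) : s ∈ compC n m val s := by
  rw [mem_compC]; exact ⟨h.1, Relation.ReflTransGen.refl⟩

-- ---------- correctness of the generic search ----------
theorem gFold_correct {σ : Type} (n m : Int) (val : Int × Int → Int)
    (memv : σ → Int × Int → Bool) (markv : σ → Int × Int → σ) (Wf : σ → Prop)
    (hmm : ∀ v c c', Wf v → inbC n m c → inbC n m c' →
      (memv (markv v c) c' = true ↔ c' = c ∨ memv v c' = true))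
    (hwm : ∀ v c, Wf v → inbC n m c → Wf (markv v c))
    (v0 : σ) (s : Int × Int) (cnt0 : Int) (c : Int × Int)
    (hokc : okC n m val c) (hreach : reachC n m val s c) :
    ∀ (ds : List (Int × Int)), (∀ d ∈ ds, d ∈ moveA) →
    ∀ (q : List (Int × Int)) (v : σ) (cnt : Int) (F : Finset (Int × Int)),
      Wf v →
      (∀ x, inbC n m x → (memv v x = true ↔ x ∈ F ∨ memv v0 x = true)) →
      (∀ x ∈ F, reachC n m val s x ∧ memv v0 x = false) →
      cnt = cnt0 + F.card →
      (∀ x ∈ q, x ∈ F) → q.Nodup →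
      ∃ (new : List (Int × Int)) (v' : σ),
        ds.foldl
          (fun (st : List (Int × Int) × σ × Int) d =>
            let y := c.1 + d.1
            let x := c.2 + d.2
            if 0 ≤ y ∧ y < n ∧ 0 ≤ x ∧ x < m ∧ val (y, x) = 1 ∧ memv st.2.1 (y, x) = false then
              (st.1 ++ [(y, x)], markv st.2.1 (y, x), st.2.2 + 1)
            else st)
          (q, v, cnt) = (q ++ new, v', cnt + new.length) ∧
        Wf v' ∧
        (∀ x, inbC n m x → (memv v' x = true ↔ x ∈ F ∪ new.toFinset ∨ memv v0 x = true)) ∧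
        (∀ x ∈ new, edgeC n m val c x ∧ x ∉ F ∧ memv v0 x = false) ∧
        new.Nodup ∧
        (∀ d ∈ ds, okC n m val (c.1 + d.1, c.2 + d.2) →
          memv v' (c.1 + d.1, c.2 + d.2) = true) := by
  intro ds
  induction ds with
  | nil =>
    intro _ q v cnt F hwf hmem hF hcnt hq hnd
    exact ⟨[], v, by simp, hwf, by simpa using hmem, by simp, List.nodup_nil, by simp⟩
  | cons d ds ih =>
    intro hds q v cnt F hwf hmem hF hcnt hq hnd
    simp only [List.foldl_cons]
    by_cases hQ : 0 ≤ c.1 + d.1 ∧ c.1 + d.1 < n ∧ 0 ≤ c.2 + d.2 ∧ c.2 + d.2 < m ∧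
        val (c.1 + d.1, c.2 + d.2) = 1 ∧ memv v (c.1 + d.1, c.2 + d.2) = false
    · rw [if_pos hQ]
      have hinb_cd : inbC n m (c.1 + d.1, c.2 + d.2) := ⟨hQ.1, hQ.2.1, hQ.2.2.1, hQ.2.2.2.1⟩
      have hok_cd : okC n m val (c.1 + d.1, c.2 + d.2) := ⟨hinb_cd, hQ.2.2.2.2.1⟩
      have hd0 : d ∈ moveA := hds d (by simp)
      have hedge : edgeC n m val c (c.1 + d.1, c.2 + d.2) := by
        refine ⟨hokc, hok_cd, ?_⟩
        have : ((c.1 + d.1, c.2 + d.2).1 - c.1, (c.1 + d.1, c.2 + d.2).2 - c.2) = d := by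
          cases d; simp
        rw [this]; exact hd0
      have hcdF : (c.1 + d.1, c.2 + d.2) ∉ F ∧ memv v0 (c.1 + d.1, c.2 + d.2) = false := by
        have h := hmem _ hinb_cd
        have hfalse := hQ.2.2.2.2.2
        constructor
        · intro hmemF
          have := h.mpr (Or.inl hmemF); rw [hfalse] at this; cases this
        · by_cases hb : memv v0 (c.1 + d.1, c.2 + d.2) = true
          · have := h.mpr (Or.inr hb); rw [hfalse] at this; cases this
          · simpa using hb
      have hmem1 : ∀ x, inbC n m x →
          (memv (markv v (c.1 + d.1, c.2 + d.2)) x = true ↔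
            x ∈ insert (c.1 + d.1, c.2 + d.2) F ∨ memv v0 x = true) := by
        intro x hx
        rw [hmm v _ x hwf hinb_cd hx, hmem x hx, Finset.mem_insert]
        tauto
      have hF1 : ∀ x ∈ insert (c.1 + d.1, c.2 + d.2) F,
          reachC n m val s x ∧ memv v0 x = false := by
        intro x hx
        rcases Finset.mem_insert.mp hx with h | h
        · subst h; exact ⟨Relation.ReflTransGen.tail hreach hedge, hcdF.2⟩
        · exact hF x h
      have hcnt1 : cnt + 1 = cnt0 + ((insert (c.1 + d.1, c.2 + d.2) F).card : Int) := by
        rw [Finset.card_insert_of_notMem hcdF.1]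
        push_cast
        omega
      have hq1 : ∀ x ∈ q ++ [(c.1 + d.1, c.2 + d.2)], x ∈ insert (c.1 + d.1, c.2 + d.2) F := by
        intro x hx
        rcases List.mem_append.mp hx with h | h
        · exact Finset.mem_insert_of_mem (hq x h)
        · simp at h; subst h; exact Finset.mem_insert_self _ _
      have hnd1 : (q ++ [(c.1 + d.1, c.2 + d.2)]).Nodup := by
        rw [List.nodup_append]
        refine ⟨hnd, List.nodup_singleton _, ?_⟩
        intro a ha b hb
        simp at hb; subst hb
        intro h; subst h
        exact hcdF.1 (hq _ ha)
      obtain ⟨new', v', heq, hwf', hmem', hnew', hnd', hproc'⟩ :=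
        ih (fun d' hd' => hds d' (List.mem_cons_of_mem _ hd'))
          (q ++ [(c.1 + d.1, c.2 + d.2)]) (markv v (c.1 + d.1, c.2 + d.2)) (cnt + 1)
          (insert (c.1 + d.1, c.2 + d.2) F)
          (hwm v _ hwf hinb_cd) hmem1 hF1 hcnt1 hq1 hnd1
      refine ⟨(c.1 + d.1, c.2 + d.2) :: new', v', ?_, hwf', ?_, ?_, ?_, ?_⟩
      · rw [heq]
        refine Prod.ext ?_ (Prod.ext rfl ?_)
        · simp
        · simp; ring
      · intro x hx
        rw [hmem' x hx]
        constructor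
        · rintro (h | h)
          · rcases Finset.mem_union.mp h with h | h
            · rcases Finset.mem_insert.mp h with h | h
              · exact Or.inl (Finset.mem_union_right _ (by simp [h]))
              · exact Or.inl (Finset.mem_union_left _ h)
            · exact Or.inl (Finset.mem_union_right _ (by simp; right; exact List.mem_toFinset.mp h))
          · exact Or.inr h
        · rintro (h | h)
          · rcases Finset.mem_union.mp h with h | h
            · exact Or.inl (Finset.mem_union_left _ (Finset.mem_insert_of_mem h))
            · rcases List.mem_cons.mp (List.mem_toFinset.mp h) with h | h
              · exact Or.inl (Finset.mem_union_left _ (by rw [h]; exact Finset.mem_insert_self _ _))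
              · exact Or.inl (Finset.mem_union_right _ (List.mem_toFinset.mpr h))
          · exact Or.inr h
      · intro x hx
        rcases List.mem_cons.mp hx with h | h
        · subst h; exact ⟨hedge, hcdF.1, hcdF.2⟩
        · obtain ⟨he, hnF, hb⟩ := hnew' x h
          exact ⟨he, fun hxF => hnF (Finset.mem_insert_of_mem hxF), hb⟩
      · rw [List.nodup_cons]
        refine ⟨?_, hnd'⟩
        intro hmem''
        exact (hnew' _ hmem'').2.1 (Finset.mem_insert_self _ _)
      · intro d' hd' hok'
        rcases List.mem_cons.mp hd' with h | h
        · subst h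
          have : memv v' (c.1 + d'.1, c.2 + d'.2) = true := by
            rw [hmem' _ hinb_cd]
            exact Or.inl (Finset.mem_union_left _ (Finset.mem_insert_self _ _))
          exact this
        · exact hproc' d' h hok'
    · rw [if_neg hQ]
      obtain ⟨new, v', heq, hwf', hmem', hnew, hndn, hproc⟩ :=
        ih (fun d' hd' => hds d' (List.mem_cons_of_mem _ hd')) q v cnt F hwf hmem hF hcnt hq hnd
      refine ⟨new, v', heq, hwf', hmem', hnew, hndn, ?_⟩
      intro d' hd' hok'
      rcases List.mem_cons.mp hd' with h | h
      · subst h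
        have hmv : memv v (c.1 + d'.1, c.2 + d'.2) = true := by
          obtain ⟨⟨a, b, c', d''⟩, e⟩ := hok'
          by_cases hb : memv v (c.1 + d'.1, c.2 + d'.2) = true
          · exact hb
          · exact absurd ⟨a, b, c', d'', e, by simpa using hb⟩ hQ
        have hinb' : inbC n m (c.1 + d'.1, c.2 + d'.2) := hok'.1
        rw [hmem' _ hinb']
        rcases (hmem _ hinb').mp hmv with h | h
        · exact Or.inl (Finset.mem_union_left _ h)
        · exact Or.inr h
      · exact hproc d' h hok'

theorem gTerminal {σ : Type} (n m : Int) (val : Int × Int → Int)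
    (memv : σ → Int × Int → Bool) (Wf : σ → Prop) (v0 : σ) (s : Int × Int) (cnt0 : Int)
    (hcl0 : ∀ c c', edgeC n m val c c' → memv v0 c = true → memv v0 c' = true)
    (v : σ) (cnt : Int) (F : Finset (Int × Int))
    (hInv : GInv n m val memv Wf v0 s cnt0 [] v cnt F) :
    (∀ x, x ∈ F ↔ reachC n m val s x ∧ memv v0 x = false) ∧
    cnt = cnt0 + F.card ∧
    (∀ x, inbC n m x → (memv v x = true ↔ reachC n m val s x ∨ memv v0 x = true)) ∧
    Wf v := by
  have hcover : ∀ x, reachC n m val s x → x ∈ F ∨ memv v0 x = true := by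
    intro x hr
    induction hr with
    | refl => exact Or.inl hInv.s_mem
    | @tail b c hab hbc ih =>
      rcases ih with h | h
      · have hml := hInv.closed b h (by simp) c hbc
        have hinb : inbC n m c := hbc.2.1.1
        exact (hInv.mem_iff c hinb).mp hml
      · exact Or.inr (hcl0 b c hbc h)
  have hchar : ∀ x, x ∈ F ↔ reachC n m val s x ∧ memv v0 x = false := by
    intro x
    constructor
    · exact hInv.F_reach x
    · rintro ⟨hr, hb⟩
      rcases hcover x hr with h | h
      · exact h
      · rw [h] at hb; cases hb
  refine ⟨hchar, hInv.cnt_eq, ?_, hInv.wf⟩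
  intro x hx
  rw [hInv.mem_iff x hx]
  constructor
  · rintro (h | h)
    · exact Or.inl ((hInv.F_reach x h).1)
    · exact Or.inr h
  · rintro (h | h)
    · exact hcover x h
    · exact Or.inr h

theorem gLoop_correct' {σ : Type} (n m : Int) (val : Int × Int → Int)
    (memv : σ → Int × Int → Bool) (markv : σ → Int × Int → σ) (Wf : σ → Prop)
    (pop : List (Int × Int) → Option ((Int × Int) × List (Int × Int)))
    (moves : List (Int × Int))
    (hG : GHyp n m val memv markv Wf pop moves)
    (v0 : σ) (s : Int × Int) (cnt0 : Int)
    (hok : okC n m val s)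
    (hcl0 : ∀ c c', edgeC n m val c c' → memv v0 c = true → memv v0 c' = true) :
    ∀ fuel p v cnt F, GInv n m val memv Wf v0 s cnt0 p v cnt F →
      p.length + ((gridC n m).card - F.card) ≤ fuel →
      ∃ G : Finset (Int × Int),
        (∀ c, c ∈ G ↔ reachC n m val s c ∧ memv v0 c = false) ∧
        (gLoop memv markv pop n m val moves fuel p v cnt).2 = cnt0 + G.card ∧
        (∀ c, inbC n m c →
          ((memv (gLoop memv markv pop n m val moves fuel p v cnt).1 c = true) ↔
            (reachC n m val s c ∨ memv v0 c = true))) ∧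
        Wf (gLoop memv markv pop n m val moves fuel p v cnt).1 := by
  intro fuel
  induction fuel with
  | zero =>
    intro p v cnt F hInv hfuel
    have hp : p = [] := by
      cases p with
      | nil => rfl
      | cons a t => simp at hfuel
    subst hp
    obtain ⟨hchar, hcnt, hmem, hwf⟩ := gTerminal n m val memv Wf v0 s cnt0 hcl0 v cnt F hInv
    exact ⟨F, hchar, hcnt, hmem, hwf⟩
  | succ f ihf =>
    intro p v cnt F hInv hfuel
    cases hpop : pop p with
    | none =>
      have hp := hG.pop_none p hpop
      subst hp
      rw [gLoop, hpop]
      obtain ⟨hchar, hcnt, hmem, hwf⟩ := gTerminal n m val memv Wf v0 s cnt0 hcl0 v cnt F hInv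
      exact ⟨F, hchar, hcnt, hmem, hwf⟩
    | some cr =>
      obtain ⟨c, rest⟩ := cr
      have hperm := hG.pop_some p c rest hpop
      have hcp : c ∈ p := hperm.mem_iff.mpr (by simp)
      have hcF : c ∈ F := hInv.p_sub c hcp
      have hreach : reachC n m val s c := (hInv.F_reach c hcF).1
      have hokc : okC n m val c := reach_ok n m val s c hok hreach
      have hndcr : (c :: rest).Nodup := (hperm.nodup_iff).mp hInv.nodup
      have hcnr : c ∉ rest := (List.nodup_cons.mp hndcr).1
      have hndrest : rest.Nodup := (List.nodup_cons.mp hndcr).2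
      have hrestF : ∀ x ∈ rest, x ∈ F := fun x hx =>
        hInv.p_sub x (hperm.mem_iff.mpr (List.mem_cons_of_mem _ hx))
      obtain ⟨new, v', heq, hwf', hmem', hnew, hndnew, hproc⟩ :=
        gFold_correct n m val memv markv Wf hG.mem_mark hG.wf_mark v0 s cnt0 c hokc hreach
          moves (fun d hd => hG.moves_perm.mem_iff.mp hd)
          rest v cnt F hInv.wf hInv.mem_iff hInv.F_reach hInv.cnt_eq hrestF hndrest
      rw [gLoop, hpop]
      simp only []
      rw [heq]
      have hdisj : Disjoint F new.toFinset := Finset.disjoint_left.mpr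
        (fun {x} hxF hxn => (hnew x (List.mem_toFinset.mp hxn)).2.1 hxF)
      have hFnew_reach : ∀ x ∈ F ∪ new.toFinset, reachC n m val s x ∧ memv v0 x = false := by
        intro x hx
        rcases Finset.mem_union.mp hx with h | h
        · exact hInv.F_reach x h
        · obtain ⟨he, _, hb⟩ := hnew x (List.mem_toFinset.mp h)
          exact ⟨Relation.ReflTransGen.tail hreach he, hb⟩
      have hcard : (F ∪ new.toFinset).card = F.card + new.length := by
        rw [Finset.card_union_of_disjoint hdisj, List.toFinset_card_of_nodup hndnew]
      have hsub : F ∪ new.toFinset ⊆ gridC n m := by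
        intro x hx
        exact ok_mem_grid n m val x (reach_ok n m val s x hok (hFnew_reach x hx).1)
      have hInv' : GInv n m val memv Wf v0 s cnt0 (rest ++ new) v' (cnt + new.length)
          (F ∪ new.toFinset) := by
        refine ⟨hwf', ?_, hmem', hFnew_reach, ?_, ?_, Finset.mem_union_left _ hInv.s_mem, ?_⟩
        · rw [List.nodup_append]
          refine ⟨hndrest, hndnew, ?_⟩
          intro a ha b hb heq'
          subst heq'
          exact (hnew a hb).2.1 (hrestF a ha)
        · intro x hx
          rcases List.mem_append.mp hx with h | h
          · exact Finset.mem_union_left _ (hrestF x h)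
          · exact Finset.mem_union_right _ (List.mem_toFinset.mpr h)
        · intro x hxF hxnp c' hedge'
          have hxnew : x ∉ new := fun h => hxnp (List.mem_append.mpr (Or.inr h))
          have hxF2 : x ∈ F := by
            rcases Finset.mem_union.mp hxF with h | h
            · exact h
            · exact absurd (List.mem_toFinset.mp h) hxnew
          by_cases hxc : x = c
          · subst hxc
            obtain ⟨_, hok', hd⟩ := hedge'
            have hc' : c' = (x.1 + (c'.1 - x.1, c'.2 - x.2).1, x.2 + (c'.1 - x.1, c'.2 - x.2).2) := by
              simp
            rw [hc']
            exact hproc _ (hG.moves_perm.mem_iff.mpr hd) (by rw [← hc']; exact hok')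
          · have hxp : x ∉ p := by
              rw [hperm.mem_iff]
              intro h
              rcases List.mem_cons.mp h with h | h
              · exact hxc h
              · exact hxnp (List.mem_append.mpr (Or.inl h))
            have hml := hInv.closed x hxF2 hxp c' hedge'
            have hinb' : inbC n m c' := hedge'.2.1.1
            rw [hmem' c' hinb']
            rcases (hInv.mem_iff c' hinb').mp hml with h | h
            · exact Or.inl (Finset.mem_union_left _ h)
            · exact Or.inr h
        · rw [hcard, hInv.cnt_eq]
          push_cast
          ring
      apply ihf (rest ++ new) v' (cnt + new.length) (F ∪ new.toFinset) hInv'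
      have hcardle := Finset.card_le_card hsub
      have hplen : p.length = rest.length + 1 := by
        rw [hperm.length_eq]; rfl
      rw [List.length_append]
      omega

theorem bfsA_eq_gLoop (n m : Int) (images : List (List Int)) :
    ∀ fuel p v cur, bfsA n m images fuel p v cur =
      gLoop memA markA popA n m (fun c => imgA images c.1 c.2) moveA fuel p v cur := by
  intro fuel
  induction fuel with
  | zero => intro p v cur; rfl
  | succ f ih =>
    intro p v cur
    cases p with
    | nil => rfl
    | cons c dq =>
      have hfold : moveA.foldl
          (fun (st : List (Int × Int) × List (List Bool) × Int) d =>
            let y := c.1 + d.1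
            let x := c.2 + d.2
            if 0 ≤ y ∧ y < n ∧ 0 ≤ x ∧ x < m then
              if imgA images y x = 1 ∧ mget st.2.1 y x = false then
                (st.1 ++ [(y, x)], mset st.2.1 y x, st.2.2 + 1)
              else st
            else st) (dq, v, cur)
        = moveA.foldl
          (fun (st : List (Int × Int) × List (List Bool) × Int) d =>
            let y := c.1 + d.1
            let x := c.2 + d.2
            if 0 ≤ y ∧ y < n ∧ 0 ≤ x ∧ x < m ∧ (fun c => imgA images c.1 c.2) (y, x) = 1 ∧ memA st.2.1 (y, x) = false then
              (st.1 ++ [(y, x)], markA st.2.1 (y, x), st.2.2 + 1)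
            else st) (dq, v, cur) := by
        apply PySem.List.foldl_congr_mem
        intro st d _
        simp only [memA, markA]
        by_cases h1 : 0 ≤ c.1 + d.1 ∧ c.1 + d.1 < n ∧ 0 ≤ c.2 + d.2 ∧ c.2 + d.2 < m
        · by_cases h2 : imgA images (c.1 + d.1) (c.2 + d.2) = 1 ∧ mget st.2.1 (c.1 + d.1) (c.2 + d.2) = false
          · rw [if_pos h1, if_pos h2, if_pos ⟨h1.1, h1.2.1, h1.2.2.1, h1.2.2.2, h2.1, h2.2⟩]
          · rw [if_pos h1, if_neg h2, if_neg (by tauto)]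
        · rw [if_neg h1, if_neg (by tauto)]
      show bfsA n m images (f + 1) (c :: dq) v cur = _
      rw [bfsA, gLoop]
      simp only [popA]
      rw [hfold, ih]

theorem ghypA (n m : Int) (images : List (List Int)) :
    GHyp n m (fun c => imgA images c.1 c.2) memA markA (WfA n m) popA moveA := by
  constructor
  · -- mem_mark
    intro v c c' hWf hc hc'
    obtain ⟨hlen, hrowlen⟩ := hWf
    obtain ⟨h1, h2, h3, h4⟩ := hc
    obtain ⟨h1', h2', h3', h4'⟩ := hc'
    have hy' : c'.1.toNat < (v.modify c.1.toNat (fun row => row.set c.2.toNat true)).length := by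
      rw [List.length_modify, hlen]; omega
    have hyv : c'.1.toNat < v.length := by rw [hlen]; omega
    simp only [memA, markA, mget, mset]
    rw [PySem.List.pyGetD_eq_getElem _ _ h1' (by push_cast [List.length_modify, hlen]; omega),
        PySem.List.pyGetD_eq_getElem (i := c'.1) _ _ h1' (by push_cast [hlen]; omega),
        List.getElem_modify]
    by_cases hre : c.1.toNat = c'.1.toNat
    · rw [if_pos hre]
      have hrl : (v[c'.1.toNat]).length = m.toNat := hrowlen _ (List.getElem_mem hyv)
      rw [PySem.List.pyGetD_eq_getElem _ _ h3' (by push_cast [List.length_set, hrl]; omega),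
          PySem.List.pyGetD_eq_getElem (xs := v[c'.1.toNat]) _ h3' (by push_cast [hrl]; omega),
          List.getElem_set]
      by_cases hce : c.2.toNat = c'.2.toNat
      · have : c' = c := by
          have e1 : c'.1 = c.1 := by omega
          have e2 : c'.2 = c.2 := by omega
          exact Prod.ext e1 e2
        simp [hce, this]
      · have : c' ≠ c := by
          intro h; apply hce; rw [h]
        rw [if_neg hce]
        simp [this]
    · rw [if_neg hre]
      have : c' ≠ c := by
        intro h; apply hre; rw [h]
      simp [this]
  · -- wf_mark
    intro v c hWf hc
    obtain ⟨hlen, hrowlen⟩ := hWf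
    constructor
    · simpa [markA, mset, List.length_modify] using hlen
    · intro row hr
      simp only [markA, mset] at hr
      obtain ⟨j, hj, hrow⟩ := List.mem_iff_getElem.mp hr
      rw [List.getElem_modify] at hrow
      have hjv : j < v.length := by simpa [List.length_modify] using hj
      by_cases hje : c.1.toNat = j
      · rw [if_pos hje] at hrow
        rw [← hrow, List.length_set]
        exact hrowlen _ (List.getElem_mem hjv)
      · rw [if_neg hje] at hrow
        rw [← hrow]
        exact hrowlen _ (List.getElem_mem hjv)
  · -- pop_some
    intro p c rest h
    cases p with
    | nil => simp [popA] at h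
    | cons a t => simp only [popA] at h; injection h with h'; injection h' with e1 e2; subst e1; subst e2; rfl
  · -- pop_none
    intro p h
    cases p with
    | nil => rfl
    | cons a t => simp [popA] at h
  · exact List.Perm.refl _

-- ---------- A's scan: absolute characterization ----------
structure AInv (n m : Int) (val : Int × Int → Int) (st : Int × Int × List (List Bool))
    (seeds : List (Int × Int)) : Prop where
  wf : WfA n m st.2.2
  seeds_ok : ∀ s ∈ seeds, okC n m val s
  seeds_sep : seeds.Pairwise (fun s t => ¬ reachC n m val s t)
  mem_iff : ∀ c, inbC n m c → (memA st.2.2 c = true ↔ ∃ s ∈ seeds, reachC n m val s c)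
  cnt : st.1 = (seeds.length : Int)
  mx : st.2.1 = (seeds.map (fun s => ((compC n m val s).card : Int))).foldl max 0

theorem cell_step_A (n m : Int) (images : List (List Int)) (i j : Int)
    (hi : 0 ≤ i) (hin : i < n) (hj : 0 ≤ j) (hjm : j < m)
    (st : Int × Int × List (List Bool)) (seeds : List (Int × Int))
    (h : AInv n m (valF images) st seeds) :
    ∃ seeds',
      AInv n m (valF images)
        (if imgA images i j = 1 ∧ mget st.2.2 i j = false then
          (st.1 + 1,
            max st.2.1 (bfsA n m images (n.toNat * m.toNat + 1) [(i, j)] (mset st.2.2 i j) 1).2,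
            (bfsA n m images (n.toNat * m.toNat + 1) [(i, j)] (mset st.2.2 i j) 1).1)
        else st) seeds' ∧
      (∀ s ∈ seeds, s ∈ seeds') ∧
      (∀ c, inbC n m c → memA st.2.2 c = true →
        memA (if imgA images i j = 1 ∧ mget st.2.2 i j = false then
          (st.1 + 1,
            max st.2.1 (bfsA n m images (n.toNat * m.toNat + 1) [(i, j)] (mset st.2.2 i j) 1).2,
            (bfsA n m images (n.toNat * m.toNat + 1) [(i, j)] (mset st.2.2 i j) 1).1)
        else st).2.2 c = true) ∧
      (valF images (i, j) = 1 →
        memA (if imgA images i j = 1 ∧ mget st.2.2 i j = false then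
          (st.1 + 1,
            max st.2.1 (bfsA n m images (n.toNat * m.toNat + 1) [(i, j)] (mset st.2.2 i j) 1).2,
            (bfsA n m images (n.toNat * m.toNat + 1) [(i, j)] (mset st.2.2 i j) 1).1)
        else st).2.2 (i, j) = true) := by
  have hinb : inbC n m (i, j) := ⟨hi, hin, hj, hjm⟩
  have hcl0 : ∀ c c', edgeC n m (valF images) c c' →
      memA st.2.2 c = true → memA st.2.2 c' = true := by
    intro c c' he hm
    have hinbc : inbC n m c := he.1.1
    have hinbc' : inbC n m c' := he.2.1.1
    rw [h.mem_iff c' hinbc']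
    obtain ⟨s, hs, hr⟩ := (h.mem_iff c hinbc).mp hm
    exact ⟨s, hs, Relation.ReflTransGen.tail hr he⟩
  by_cases hg : imgA images i j = 1 ∧ mget st.2.2 i j = false
  · rw [if_pos hg]
    have hok_s : okC n m (valF images) (i, j) := ⟨hinb, hg.1⟩
    have hs0 : memA st.2.2 (i, j) = false := hg.2
    have hgrid : (i, j) ∈ gridC n m := ok_mem_grid n m (valF images) _ hok_s
    have hgcard : 1 ≤ (gridC n m).card := Finset.card_pos.mpr ⟨_, hgrid⟩
    have hfuel : ([((i : Int), (j : Int))].length) +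
        ((gridC n m).card - ({((i : Int), (j : Int))} : Finset (Int × Int)).card) ≤
        n.toNat * m.toNat + 1 := by
      rw [card_gridC]
      simp only [List.length_singleton, Finset.card_singleton]
      rw [card_gridC] at hgcard
      omega
    have hInvG : GInv n m (valF images) memA (WfA n m) st.2.2 (i, j) 0
        [(i, j)] (markA st.2.2 (i, j)) 1 {(i, j)} := by
      refine ⟨(ghypA n m images).wf_mark _ _ h.wf hinb, by simp, ?_, ?_, ?_, ?_, by simp, by simp⟩
      · intro x hx
        rw [(ghypA n m images).mem_mark _ _ x h.wf hinb hx]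
        simp only [Finset.mem_singleton]
      · intro x hx
        rw [Finset.mem_singleton] at hx
        subst hx
        exact ⟨Relation.ReflTransGen.refl, hs0⟩
      · intro x hx
        simp only [List.mem_singleton] at hx
        simp [hx]
      · intro x hxF hxp
        rw [Finset.mem_singleton] at hxF
        exact absurd (by simp [hxF]) hxp
    obtain ⟨G, hGchar, hcntG, hmemG, hwfG⟩ :=
      gLoop_correct' n m (valF images) memA markA (WfA n m) popA moveA (ghypA n m images)
        st.2.2 (i, j) 0 hok_s hcl0 (n.toNat * m.toNat + 1)
        [(i, j)] (markA st.2.2 (i, j)) 1 {(i, j)} hInvG hfuel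
    have hGcomp : G = compC n m (valF images) (i, j) := by
      apply Finset.ext
      intro c
      rw [hGchar c, mem_compC]
      constructor
      · rintro ⟨hr, hb⟩
        exact ⟨(reach_ok n m (valF images) _ c hok_s hr).1, hr⟩
      · rintro ⟨hc, hr⟩
        refine ⟨hr, ?_⟩
        by_cases hb : memA st.2.2 c = true
        · obtain ⟨s, hsm, hsr⟩ := (h.mem_iff c hc).mp hb
          have : memA st.2.2 (i, j) = true := by
            rw [h.mem_iff _ hinb]
            exact ⟨s, hsm, reach_trans n m _ _ _ _ hsr (reach_symm n m _ _ _ hr)⟩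
          rw [hs0] at this; cases this
        · simpa using hb
    have hnotseed : ∀ s ∈ seeds, ¬ reachC n m (valF images) s (i, j) := by
      intro s hs hr
      have : memA st.2.2 (i, j) = true := by
        rw [h.mem_iff _ hinb]; exact ⟨s, hs, hr⟩
      rw [hs0] at this; cases this
    rw [bfsA_eq_gLoop]
    rw [show (fun (c : Int × Int) => imgA images c.1 c.2) = valF images from rfl,
        show mset st.2.2 i j = markA st.2.2 (i, j) from rfl]
    refine ⟨seeds ++ [(i, j)], ⟨hwfG, ?_, ?_, ?_, ?_, ?_⟩, ?_, ?_, ?_⟩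
    · intro s hs
      rcases List.mem_append.mp hs with h' | h'
      · exact h.seeds_ok s h'
      · simp only [List.mem_singleton] at h'; subst h'; exact hok_s
    · rw [List.pairwise_append]
      refine ⟨h.seeds_sep, List.pairwise_singleton _ _, ?_⟩
      intro s hs t ht
      simp only [List.mem_singleton] at ht; subst ht
      exact hnotseed s hs
    · intro c hc
      dsimp only
      rw [hmemG c hc, h.mem_iff c hc]
      constructor
      · rintro (h' | ⟨s, hs, hr⟩)
        · exact ⟨(i, j), by simp, h'⟩
        · exact ⟨s, List.mem_append.mpr (Or.inl hs), hr⟩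
      · rintro ⟨s, hs, hr⟩
        rcases List.mem_append.mp hs with h' | h'
        · exact Or.inr ⟨s, h', hr⟩
        · simp only [List.mem_singleton] at h'; subst h'; exact Or.inl hr
    · dsimp only
      rw [h.cnt]
      simp only [List.length_append, List.length_singleton]
      push_cast
      ring
    · dsimp only
      rw [h.mx, List.map_append, List.foldl_append]
      simp only [List.map_cons, List.map_nil, List.foldl_cons, List.foldl_nil]
      rw [hcntG, hGcomp, zero_add]
    · intro s hs; exact List.mem_append.mpr (Or.inl hs)
    · intro c hc hm
      dsimp only
      rw [hmemG c hc]
      exact Or.inr hm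
    · intro _
      dsimp only
      rw [hmemG _ hinb]
      exact Or.inl Relation.ReflTransGen.refl
  · rw [if_neg hg]
    refine ⟨seeds, h, fun s hs => hs, fun c _ hm => hm, ?_⟩
    intro hval
    by_cases hb : mget st.2.2 i j = false
    · exact absurd ⟨hval, hb⟩ hg
    · simpa [memA] using hb

theorem inner_fold_A (n m : Int) (images : List (List Int)) (i : Int)
    (hi : 0 ≤ i) (hin : i < n) :
    ∀ (js : List Int), (∀ j ∈ js, 0 ≤ j ∧ j < m) →
    ∀ (st : Int × Int × List (List Bool)) (seeds : List (Int × Int)),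
      AInv n m (valF images) st seeds →
    ∃ seeds',
      AInv n m (valF images)
        (js.foldl (fun (st : Int × Int × List (List Bool)) ii =>
          if imgA images i ii = 1 ∧ mget st.2.2 i ii = false then
            let visited := mset st.2.2 i ii
            let res := bfsA n m images (n.toNat * m.toNat + 1) [(i, ii)] visited 1
            (st.1 + 1, max st.2.1 res.2, res.1)
          else st) st) seeds' ∧
      (∀ s ∈ seeds, s ∈ seeds') ∧
      (∀ c, inbC n m c → memA st.2.2 c = true →
        memA (js.foldl (fun (st : Int × Int × List (List Bool)) ii =>
          if imgA images i ii = 1 ∧ mget st.2.2 i ii = false then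
            let visited := mset st.2.2 i ii
            let res := bfsA n m images (n.toNat * m.toNat + 1) [(i, ii)] visited 1
            (st.1 + 1, max st.2.1 res.2, res.1)
          else st) st).2.2 c = true) ∧
      (∀ j ∈ js, valF images (i, j) = 1 →
        memA (js.foldl (fun (st : Int × Int × List (List Bool)) ii =>
          if imgA images i ii = 1 ∧ mget st.2.2 i ii = false then
            let visited := mset st.2.2 i ii
            let res := bfsA n m images (n.toNat * m.toNat + 1) [(i, ii)] visited 1
            (st.1 + 1, max st.2.1 res.2, res.1)
          else st) st).2.2 (i, j) = true) := by
  intro js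
  induction js with
  | nil =>
    intro _ st seeds h
    exact ⟨seeds, h, fun s hs => hs, fun c _ hm => hm, by simp⟩
  | cons j t ih =>
    intro hjs st seeds h
    have hj := hjs j (by simp)
    obtain ⟨seeds1, h1, hsub1, hmono1, hself1⟩ :=
      cell_step_A n m images i j hi hin hj.1 hj.2 st seeds h
    obtain ⟨seeds', h', hsub', hmono', hcov'⟩ :=
      ih (fun j' hj' => hjs j' (List.mem_cons_of_mem _ hj')) _ seeds1 h1
    simp only [List.foldl_cons]
    refine ⟨seeds', h', fun s hs => hsub' s (hsub1 s hs), ?_, ?_⟩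
    · intro c hc hm
      exact hmono' c hc (hmono1 c hc hm)
    · intro j' hj' hval
      rcases List.mem_cons.mp hj' with h'' | h''
      · subst h''
        have hinb : inbC n m (i, j') := ⟨hi, hin, hj.1, hj.2⟩
        exact hmono' _ hinb (hself1 hval)
      · exact hcov' j' h'' hval

theorem outer_fold_A (n m : Int) (images : List (List Int)) :
    ∀ (is : List Int), (∀ i ∈ is, 0 ≤ i ∧ i < n) →
    ∀ (st : Int × Int × List (List Bool)) (seeds : List (Int × Int)),
      AInv n m (valF images) st seeds →
    ∃ seeds',
      AInv n m (valF images)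
        (is.foldl (fun st i =>
          (PySem.List.pyRange 0 m 1).foldl (fun (st : Int × Int × List (List Bool)) ii =>
            if imgA images i ii = 1 ∧ mget st.2.2 i ii = false then
              let visited := mset st.2.2 i ii
              let res := bfsA n m images (n.toNat * m.toNat + 1) [(i, ii)] visited 1
              (st.1 + 1, max st.2.1 res.2, res.1)
            else st) st) st) seeds' ∧
      (∀ c, inbC n m c → memA st.2.2 c = true →
        memA (is.foldl (fun st i =>
          (PySem.List.pyRange 0 m 1).foldl (fun (st : Int × Int × List (List Bool)) ii =>
            if imgA images i ii = 1 ∧ mget st.2.2 i ii = false then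
              let visited := mset st.2.2 i ii
              let res := bfsA n m images (n.toNat * m.toNat + 1) [(i, ii)] visited 1
              (st.1 + 1, max st.2.1 res.2, res.1)
            else st) st) st).2.2 c = true) ∧
      (∀ i ∈ is, ∀ j ∈ PySem.List.pyRange 0 m 1, valF images (i, j) = 1 →
        memA (is.foldl (fun st i =>
          (PySem.List.pyRange 0 m 1).foldl (fun (st : Int × Int × List (List Bool)) ii =>
            if imgA images i ii = 1 ∧ mget st.2.2 i ii = false then
              let visited := mset st.2.2 i ii
              let res := bfsA n m images (n.toNat * m.toNat + 1) [(i, ii)] visited 1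
              (st.1 + 1, max st.2.1 res.2, res.1)
            else st) st) st).2.2 (i, j) = true) := by
  intro is
  induction is with
  | nil =>
    intro _ st seeds h
    exact ⟨seeds, h, fun c _ hm => hm, by simp⟩
  | cons i t ih =>
    intro his st seeds h
    have hi := his i (by simp)
    obtain ⟨seeds1, h1, _, hmono1, hcov1⟩ :=
      inner_fold_A n m images i hi.1 hi.2 (PySem.List.pyRange 0 m 1)
        (fun j hj => PySem.List.mem_pyRange_one.mp hj) st seeds h
    obtain ⟨seeds', h', hmono', hcov'⟩ :=
      ih (fun i' hi' => his i' (List.mem_cons_of_mem _ hi')) _ seeds1 h1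
    simp only [List.foldl_cons]
    refine ⟨seeds', h', ?_, ?_⟩
    · intro c hc hm
      exact hmono' c hc (hmono1 c hc hm)
    · intro i' hi' j hjmem hval
      rcases List.mem_cons.mp hi' with h'' | h''
      · subst h''
        have hj := PySem.List.mem_pyRange_one.mp hjmem
        have hinb : inbC n m (i', j) := ⟨hi.1, hi.2, hj.1, hj.2⟩
        exact hmono' _ hinb (hcov1 j hjmem hval)
      · exact hcov' i' h'' j hjmem hval

theorem init_AInv (n m : Int) (images : List (List Int)) :
    AInv n m (valF images)
      ((0 : Int), (0 : Int), List.replicate n.toNat (List.replicate m.toNat false)) [] := by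
  have hmem0 : ∀ c, inbC n m c →
      memA (List.replicate n.toNat (List.replicate m.toNat false)) c = false := by
    intro c hc
    obtain ⟨h1, h2, h3, h4⟩ := hc
    simp only [memA, mget]
    rw [PySem.List.pyGetD_eq_getElem _ _ h1 (by simp [List.length_replicate]; omega),
        List.getElem_replicate,
        PySem.List.pyGetD_eq_getElem _ _ h3 (by simp [List.length_replicate]; omega),
        List.getElem_replicate]
  refine ⟨⟨by simp, ?_⟩, by simp, List.Pairwise.nil, ?_, rfl, rfl⟩
  · intro row hr
    rw [List.eq_of_mem_replicate hr]
    simp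
  · intro c hc
    rw [hmem0 c hc]
    simp

theorem solution_A_char' (n m : Int) (images : List (List Int)) :
    CharL n m (valF images) (solution n m images) := by
  obtain ⟨seedsF, hInv, _, hcov⟩ :=
    outer_fold_A n m images (PySem.List.pyRange 0 n 1)
      (fun i hi => PySem.List.mem_pyRange_one.mp hi)
      ((0 : Int), (0 : Int), List.replicate n.toNat (List.replicate m.toNat false))
      [] (init_AInv n m images)
  refine ⟨seedsF.map (compC n m (valF images)), ?_, ?_, ?_⟩
  · rw [List.nodup_iff_pairwise_ne, List.pairwise_map]
    refine List.Pairwise.imp_of_mem ?_ hInv.seeds_sep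
    intro s t hs ht hnr heq
    have hks : s ∈ compC n m (valF images) t := by
      rw [← heq]
      exact self_mem_comp n m (valF images) s (hInv.seeds_ok s hs)
    rw [mem_compC] at hks
    exact hnr (reach_symm n m (valF images) _ _ hks.2)
  · intro K
    constructor
    · intro hK
      obtain ⟨s, hs, hKs⟩ := List.mem_map.mp hK
      exact ⟨s, hInv.seeds_ok s hs, hKs.symm⟩
    · rintro ⟨c, hok, rfl⟩
      have hib : inbC n m c := hok.1
      have h1 : c.1 ∈ PySem.List.pyRange 0 n 1 :=
        PySem.List.mem_pyRange_one.mpr ⟨hib.1, hib.2.1⟩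
      have h2 : c.2 ∈ PySem.List.pyRange 0 m 1 :=
        PySem.List.mem_pyRange_one.mpr ⟨hib.2.2.1, hib.2.2.2⟩
      have h3 := hcov c.1 h1 c.2 h2
        (by rw [show ((c.1 : Int), (c.2 : Int)) = c from rfl]; exact hok.2)
      rw [show ((c.1 : Int), (c.2 : Int)) = c from rfl] at h3
      obtain ⟨s, hs, hr⟩ := (hInv.mem_iff c hib).mp h3
      exact List.mem_map.mpr ⟨s, hs, comp_congr n m (valF images) s c hr⟩
  · simp only [solution]
    refine Prod.ext ?_ ?_
    · simpa using hInv.cnt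
    · rw [show ((seedsF.map (compC n m (valF images))).map (fun K => (K.card : Int)))
        = seedsF.map (fun s => ((compC n m (valF images) s).card : Int)) from by
          rw [List.map_map]; rfl]
      exact hInv.mx


-- ---------- B's union-find: index space ----------
def idxc (m : Int) (c : Int × Int) : Int := c.1 * m + c.2
def domP (n m : Int) (val : Int × Int → Int) (x : Int) : Prop :=
  ∃ c, okC n m val c ∧ idxc m c = x
def connP (n m : Int) (val : Int × Int → Int) (x y : Int) : Prop :=
  ∃ c d, okC n m val c ∧ okC n m val d ∧ idxc m c = x ∧ idxc m d = y ∧ reachC n m val c d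

theorem idxc_inj (n m : Int) (c d : Int × Int) (hc : inbC n m c) (hd : inbC n m d)
    (h : idxc m c = idxc m d) : c = d := by
  obtain ⟨hc1, hc2, hc3, hc4⟩ := hc
  obtain ⟨hd1, hd2, hd3, hd4⟩ := hd
  simp only [idxc] at h
  have h1 : (c.1 - d.1) * m = d.2 - c.2 := by ring_nf; linarith
  have hfst : c.1 = d.1 := by
    rcases lt_trichotomy c.1 d.1 with hlt | heq | hgt
    · have : (c.1 - d.1) * m ≤ -1 * m := by
        apply mul_le_mul_of_nonneg_right (by omega) (by omega)
      omega
    · exact heq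
    · have : 1 * m ≤ (c.1 - d.1) * m := by
        apply mul_le_mul_of_nonneg_right (by omega) (by omega)
      omega
  have hsnd : c.2 = d.2 := by
    rw [hfst] at h1
    simp at h1
    omega
  exact Prod.ext hfst hsnd

theorem domP_bounds (n m : Int) (val : Int × Int → Int) (x : Int) (h : domP n m val x) :
    0 ≤ x ∧ x < n * m := by
  obtain ⟨c, hok, rfl⟩ := h
  obtain ⟨⟨h1, h2, h3, h4⟩, _⟩ := hok
  constructor
  · have : 0 ≤ c.1 * m := mul_nonneg h1 (by omega)
    simp only [idxc]; omega
  · have : (c.1 + 1) * m ≤ n * m := mul_le_mul_of_nonneg_right (by omega) (by omega)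
    simp only [idxc]; nlinarith

theorem domP_lt_fuel (n m : Int) (val : Int × Int → Int) (x : Int) (h : domP n m val x) :
    x.toNat < fuelB n m := by
  obtain ⟨h0, hlt⟩ := domP_bounds n m val x h
  obtain ⟨c, hok, _⟩ := h
  obtain ⟨⟨h1, h2, h3, h4⟩, _⟩ := hok
  have hn : 0 < n := by omega
  have hm : 0 < m := by omega
  have : (n * m) = ((n.toNat * m.toNat : Nat) : Int) := by
    push_cast
    rw [Int.toNat_of_nonneg (by omega), Int.toNat_of_nonneg (by omega)]
  rw [fuelB]
  omega

theorem connP_dom_left (n m : Int) (val : Int × Int → Int) (x y : Int)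
    (h : connP n m val x y) : domP n m val x := by
  obtain ⟨c, d, hc, hd, hcx, hdy, hr⟩ := h
  exact ⟨c, hc, hcx⟩

theorem connP_dom_right (n m : Int) (val : Int × Int → Int) (x y : Int)
    (h : connP n m val x y) : domP n m val y := by
  obtain ⟨c, d, hc, hd, hcx, hdy, hr⟩ := h
  exact ⟨d, hd, hdy⟩

theorem connP_refl (n m : Int) (val : Int × Int → Int) (x : Int) (h : domP n m val x) :
    connP n m val x x := by
  obtain ⟨c, hok, rfl⟩ := h
  exact ⟨c, c, hok, hok, rfl, rfl, Relation.ReflTransGen.refl⟩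

theorem connP_symm (n m : Int) (val : Int × Int → Int) (x y : Int)
    (h : connP n m val x y) : connP n m val y x := by
  obtain ⟨c, d, hc, hd, hcx, hdy, hr⟩ := h
  exact ⟨d, c, hd, hc, hdy, hcx, reach_symm n m val c d hr⟩

theorem connP_trans (n m : Int) (val : Int × Int → Int) (x y z : Int)
    (h1 : connP n m val x y) (h2 : connP n m val y z) : connP n m val x z := by
  obtain ⟨c, d, hc, hd, hcx, hdy, hr⟩ := h1
  obtain ⟨d', e, hd', he, hd'y, hez, hr'⟩ := h2
  have hdd' : d = d' := idxc_inj n m d d' hd.1 hd'.1 (by rw [hdy, hd'y])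
  subst hdd'
  exact ⟨c, e, hc, he, hcx, hez, reach_trans n m val c d e hr hr'⟩

-- ---------- invariant of the parent dict ----------
def PInvP (n m : Int) (val : Int × Int → Int) (P : PySem.Dict Int Int) : Prop :=
  P.keys.Nodup ∧
  (∀ x : Int, (P.get? x).isSome ↔ domP n m val x) ∧
  (∀ x p : Int, P.get? x = some p → p ≤ x ∧ connP n m val x p)

-- proof-only name for find at the port's fuel
def rootP (n m : Int) (P : PySem.Dict Int Int) (x : Int) : Int := findB P (fuelB n m) x

theorem findB_root_fixed (n m : Int) (P : PySem.Dict Int Int) (r : Int)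
    (h : P.get? r = some r) : ∀ f, 0 < f → findB P f r = r := by
  intro f hf
  cases f with
  | zero => omega
  | succ f' => simp [findB, h]

theorem rootP_root_fixed (n m : Int) (P : PySem.Dict Int Int) (r : Int)
    (h : P.get? r = some r) : rootP n m P r = r :=
  findB_root_fixed n m P r h (fuelB n m) (by simp [fuelB])

theorem find_props (n m : Int) (val : Int × Int → Int) (P : PySem.Dict Int Int)
    (hInv : PInvP n m val P) :
    ∀ N : Nat, ∀ x : Int, domP n m val x → x.toNat ≤ N →
      P.get? (rootP n m P x) = some (rootP n m P x) ∧
      connP n m val x (rootP n m P x) ∧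
      rootP n m P x ≤ x ∧
      (∀ f : Nat, x.toNat < f → findB P f x = rootP n m P x) := by
  obtain ⟨hnd, hiso, hval⟩ := hInv
  intro N
  induction N with
  | zero =>
    intro x hdom hle
    obtain ⟨p, hp⟩ := Option.isSome_iff_exists.mp ((hiso x).mpr hdom)
    have hpx := hval x p hp
    have hx0 : 0 ≤ x := (domP_bounds n m val x hdom).1
    have hp0 : 0 ≤ p := (domP_bounds n m val p (connP_dom_right n m val x p hpx.2)).1
    have hpeq : p = x := by omega
    subst hpeq
    have hroot : rootP n m P p = p := rootP_root_fixed n m P p hp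
    rw [hroot]
    exact ⟨hp, connP_refl n m val p hdom, le_refl _,
      fun f hf => findB_root_fixed n m P p hp f (by omega)⟩
  | succ N ih =>
    intro x hdom hle
    obtain ⟨p, hp⟩ := Option.isSome_iff_exists.mp ((hiso x).mpr hdom)
    have hpx := hval x p hp
    have hx0 : 0 ≤ x := (domP_bounds n m val x hdom).1
    have hdp : domP n m val p := connP_dom_right n m val x p hpx.2
    have hp0 : 0 ≤ p := (domP_bounds n m val p hdp).1
    by_cases hpeq : p = x
    · subst hpeq
      have hroot : rootP n m P p = p := rootP_root_fixed n m P p hp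
      rw [hroot]
      exact ⟨hp, connP_refl n m val p hdom, le_refl _,
        fun f hf => findB_root_fixed n m P p hp f (by omega)⟩
    · have hplt : p < x := by
        rcases lt_or_eq_of_le hpx.1 with h | h
        · exact h
        · exact absurd h hpeq
      have hpN : p.toNat ≤ N := by omega
      obtain ⟨ihr, ihc, ihle, ihf⟩ := ih p hdp hpN
      have hstep : ∀ f : Nat, x.toNat < f → findB P f x = rootP n m P p := by
        intro f hf
        cases f with
        | zero => omega
        | succ f' =>
          rw [findB, hp]
          simp only [if_neg hpeq]
          exact ihf f' (by omega)
      have hrx : rootP n m P x = rootP n m P p :=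
        hstep (fuelB n m) (domP_lt_fuel n m val x hdom)
      rw [hrx]
      exact ⟨ihr, connP_trans n m val x p _ hpx.2 ihc, le_trans ihle (le_of_lt hplt),
        fun f hf => hstep f hf⟩

-- effect of parent[u] := v (u, v roots, v < u) on every root
theorem root_insert (n m : Int) (val : Int × Int → Int) (P : PySem.Dict Int Int)
    (hInv : PInvP n m val P) (u v : Int)
    (hu : P.get? u = some u) (hv : P.get? v = some v) (hvu : v < u)
    (hconn : connP n m val u v) :
    PInvP n m val (P.insert u v) ∧
    (∀ x, domP n m val x →
      rootP n m (P.insert u v) x = if rootP n m P x = u then v else rootP n m P x) := by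
  obtain ⟨hnd, hiso, hval⟩ := hInv
  have hget : ∀ x, (P.insert u v).get? x = if x = u then some v else P.get? x :=
    fun x => PySem.Dict.get?_insert P u x v
  have hInv' : PInvP n m val (P.insert u v) := by
    refine ⟨PySem.Dict.nodup_keys_insert P u v hnd, ?_, ?_⟩
    · intro x
      rw [hget]
      by_cases hx : x = u
      · rw [if_pos hx, hx]
        simp only [Option.isSome_some, true_iff]
        exact connP_dom_left n m val u v hconn
      · rw [if_neg hx]
        exact hiso x
    · intro x p h
      rw [hget] at h
      by_cases hx : x = u
      · rw [if_pos hx] at h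
        injection h with h
        rw [hx, ← h]
        exact ⟨le_of_lt hvu, hconn⟩
      · rw [if_neg hx] at h
        exact hval x p h
  refine ⟨hInv', ?_⟩
  have hdv : domP n m val v := connP_dom_right n m val u v hconn
  have hv0 : 0 ≤ v := (domP_bounds n m val v hdv).1
  have hvne : v ≠ u := ne_of_lt hvu
  have hrootu' : ∀ f : Nat, 0 < f → findB (P.insert u v) f u = v := by
    intro f hf
    cases f with
    | zero => omega
    | succ f' =>
      rw [findB]
      rw [show (P.insert u v).get? u = some v from by rw [hget]; simp]
      simp only [if_neg hvne]
      cases f' with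
      | zero => rfl
      | succ f'' =>
        exact findB_root_fixed n m (P.insert u v) v
          (by rw [hget, if_neg hvne]; exact hv) (f'' + 1) (by omega)
  have main : ∀ N : Nat, ∀ x, domP n m val x → x.toNat ≤ N →
      rootP n m (P.insert u v) x = if rootP n m P x = u then v else rootP n m P x := by
    intro N
    induction N with
    | zero =>
      intro x hdom hle
      obtain ⟨p, hp⟩ := Option.isSome_iff_exists.mp ((hiso x).mpr hdom)
      have hpx := hval x p hp
      have hx0 : 0 ≤ x := (domP_bounds n m val x hdom).1
      have hp0 : 0 ≤ p := (domP_bounds n m val p (connP_dom_right n m val x p hpx.2)).1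
      have hpeq : p = x := by omega
      subst hpeq
      have hxu : p ≠ u := by
        intro h
        have hu0 : 0 ≤ u := (domP_bounds n m val u (connP_dom_left n m val u v hconn)).1
        omega
      have h1 : rootP n m P p = p := rootP_root_fixed n m P p hp
      have h2 : rootP n m (P.insert u v) p = p :=
        rootP_root_fixed n m (P.insert u v) p (by rw [hget, if_neg hxu]; exact hp)
      rw [h1, h2, if_neg hxu]
    | succ N ih =>
      intro x hdom hle
      by_cases hxu : x = u
      · subst hxu
        have h1 : rootP n m P x = x := rootP_root_fixed n m P x hu
        rw [h1, if_pos rfl]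
        exact hrootu' (fuelB n m) (by rw [fuelB]; omega)
      · obtain ⟨p, hp⟩ := Option.isSome_iff_exists.mp ((hiso x).mpr hdom)
        have hpx := hval x p hp
        have hx0 : 0 ≤ x := (domP_bounds n m val x hdom).1
        have hdp : domP n m val p := connP_dom_right n m val x p hpx.2
        have hp0 : 0 ≤ p := (domP_bounds n m val p hdp).1
        have hp' : (P.insert u v).get? x = some p := by rw [hget, if_neg hxu]; exact hp
        by_cases hpeq : p = x
        · subst hpeq
          have h1 : rootP n m P p = p := rootP_root_fixed n m P p hp
          have h2 : rootP n m (P.insert u v) p = p :=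
            rootP_root_fixed n m (P.insert u v) p hp'
          rw [h1, h2, if_neg hxu]
        · have hplt : p < x := by
            rcases lt_or_eq_of_le hpx.1 with h | h
            · exact h
            · exact absurd h hpeq
          have hfx := domP_lt_fuel n m val x hdom
          have hfuelsucc : fuelB n m = (n.toNat * m.toNat) + 1 := rfl
          have hstepP : rootP n m P x = rootP n m P p := by
            rw [rootP, hfuelsucc, findB, hp]
            simp only [if_neg hpeq]
            exact (find_props n m val P ⟨hnd, hiso, hval⟩ p.toNat p hdp le_rfl).2.2.2
              (n.toNat * m.toNat) (by rw [hfuelsucc] at hfx; omega)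
          have hstepP' : rootP n m (P.insert u v) x = rootP n m (P.insert u v) p := by
            rw [rootP, hfuelsucc, findB, hp']
            simp only [if_neg hpeq]
            exact (find_props n m val (P.insert u v) hInv' p.toNat p hdp le_rfl).2.2.2
              (n.toNat * m.toNat) (by rw [hfuelsucc] at hfx; omega)
          rw [hstepP, hstepP']
          exact ih p hdp (by omega)
  intro x hdom
  exact main x.toNat x hdom (le_refl _)

-- ---------- union of two roots ----------
def PresR (n m : Int) (val : Int × Int → Int) (d d' : PySem.Dict Int Int) : Prop :=
  ∀ x y, domP n m val x → domP n m val y → rootP n m d x = rootP n m d y →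
    rootP n m d' x = rootP n m d' y

theorem presR_refl (n m : Int) (val : Int × Int → Int) (d : PySem.Dict Int Int) :
    PresR n m val d d := fun _ _ _ _ h => h

theorem presR_trans (n m : Int) (val : Int × Int → Int) (d1 d2 d3 : PySem.Dict Int Int)
    (h1 : PresR n m val d1 d2) (h2 : PresR n m val d2 d3) : PresR n m val d1 d3 :=
  fun x y hx hy h => h2 x y hx hy (h1 x y hx hy h)

theorem unionB_spec (n m : Int) (val : Int × Int → Int) (P : PySem.Dict Int Int)
    (hInv : PInvP n m val P) (a b : Int)
    (hda : domP n m val a) (hdb : domP n m val b) (hconn : connP n m val a b) :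
    PInvP n m val (unionB P (rootP n m P a) (rootP n m P b)) ∧
    PresR n m val P (unionB P (rootP n m P a) (rootP n m P b)) ∧
    rootP n m (unionB P (rootP n m P a) (rootP n m P b)) a =
      rootP n m (unionB P (rootP n m P a) (rootP n m P b)) b := by
  obtain ⟨hra_r, hca, hla, _⟩ := find_props n m val P hInv a.toNat a hda le_rfl
  obtain ⟨hrb_r, hcb, hlb, _⟩ := find_props n m val P hInv b.toNat b hdb le_rfl
  have hconn_rr : connP n m val (rootP n m P a) (rootP n m P b) :=
    connP_trans n m val _ _ _
      (connP_trans n m val _ _ _ (connP_symm n m val _ _ hca) hconn) hcb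
  rcases lt_trichotomy (rootP n m P a) (rootP n m P b) with hlt | heq | hgt
  · have hub : unionB P (rootP n m P a) (rootP n m P b) =
        P.insert (rootP n m P b) (rootP n m P a) := by
      simp [unionB, hlt]
    obtain ⟨hInv', hform⟩ := root_insert n m val P hInv (rootP n m P b) (rootP n m P a)
      hrb_r hra_r hlt (connP_symm n m val _ _ hconn_rr)
    rw [hub]
    refine ⟨hInv', ?_, ?_⟩
    · intro x y hx hy h
      rw [hform x hx, hform y hy, h]
    · rw [hform a hda, hform b hdb, if_neg (ne_of_lt hlt), if_pos rfl]
  · have hub : unionB P (rootP n m P a) (rootP n m P b) = P := by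
      simp [unionB, heq]
    rw [hub]
    exact ⟨hInv, presR_refl n m val P, heq⟩
  · have hub : unionB P (rootP n m P a) (rootP n m P b) =
        P.insert (rootP n m P a) (rootP n m P b) := by
      have : ¬ rootP n m P a < rootP n m P b := by omega
      simp [unionB, this, hgt]
    obtain ⟨hInv', hform⟩ := root_insert n m val P hInv (rootP n m P a) (rootP n m P b)
      hra_r hrb_r hgt hconn_rr
    rw [hub]
    refine ⟨hInv', ?_, ?_⟩
    · intro x y hx hy h
      rw [hform x hx, hform y hy, h]
    · rw [hform a hda, hform b hdb, if_pos rfl, if_neg (ne_of_lt hgt)]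

-- edge-processed facts at a cell
def EAt (n m : Int) (images : List (List Int)) (P : PySem.Dict Int Int) (i j : Int) : Prop :=
  imgA images i j = 1 → 0 ≤ i → i < n → 0 ≤ j → j < m →
    ((i + 1 < n → imgA images (i + 1) j = 1 →
        rootP n m P (i * m + j) = rootP n m P ((i + 1) * m + j)) ∧
     (j + 1 < m → imgA images i (j + 1) = 1 →
        rootP n m P (i * m + j) = rootP n m P (i * m + j + 1)))

theorem ok_cell (n m : Int) (images : List (List Int)) (i j : Int)
    (h1 : imgA images i j = 1) (h2 : 0 ≤ i) (h3 : i < n) (h4 : 0 ≤ j) (h5 : j < m) :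
    okC n m (valF images) (i, j) := ⟨⟨h2, h3, h4, h5⟩, h1⟩

theorem domP_cell (n m : Int) (images : List (List Int)) (i j : Int)
    (h1 : imgA images i j = 1) (h2 : 0 ≤ i) (h3 : i < n) (h4 : 0 ≤ j) (h5 : j < m) :
    domP n m (valF images) (i * m + j) :=
  ⟨(i, j), ok_cell n m images i j h1 h2 h3 h4 h5, rfl⟩

theorem EAt_mono (n m : Int) (images : List (List Int)) (d d' : PySem.Dict Int Int)
    (hpres : PresR n m (valF images) d d') (i j : Int) (h : EAt n m images d i j) :
    EAt n m images d' i j := by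
  intro h1 h2 h3 h4 h5
  obtain ⟨hdown, hright⟩ := h h1 h2 h3 h4 h5
  constructor
  · intro hi1 himg1
    exact hpres _ _ (domP_cell n m images i j h1 h2 h3 h4 h5)
      (⟨(i + 1, j), ok_cell n m images (i + 1) j himg1 (by omega) hi1 h4 h5, by
        simp [idxc]⟩) (hdown hi1 himg1)
  · intro hj1 himg1
    exact hpres _ _ (domP_cell n m images i j h1 h2 h3 h4 h5)
      (⟨(i, j + 1), ok_cell n m images i (j + 1) himg1 h2 h3 (by omega) hj1, by
        simp [idxc]; ring⟩) (hright hj1 himg1)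

theorem cellU (n m : Int) (images : List (List Int)) (i j : Int)
    (hi0 : 0 ≤ i) (hin : i < n) (hj0 : 0 ≤ j) (hjm : j < m)
    (d : PySem.Dict Int Int) (hInv : PInvP n m (valF images) d) :
    PInvP n m (valF images)
      (if imgA images i j = 1 then
        let d1 := if i + 1 < n ∧ imgA images (i + 1) j = 1 then
            unionB d (findB d (fuelB n m) (i * m + j)) (findB d (fuelB n m) ((i + 1) * m + j)) else d
        if j + 1 < m ∧ imgA images i (j + 1) = 1 then
            unionB d1 (findB d1 (fuelB n m) (i * m + j)) (findB d1 (fuelB n m) (i * m + j + 1)) else d1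
      else d) ∧
    PresR n m (valF images) d
      (if imgA images i j = 1 then
        let d1 := if i + 1 < n ∧ imgA images (i + 1) j = 1 then
            unionB d (findB d (fuelB n m) (i * m + j)) (findB d (fuelB n m) ((i + 1) * m + j)) else d
        if j + 1 < m ∧ imgA images i (j + 1) = 1 then
            unionB d1 (findB d1 (fuelB n m) (i * m + j)) (findB d1 (fuelB n m) (i * m + j + 1)) else d1
      else d) ∧
    EAt n m images
      (if imgA images i j = 1 then
        let d1 := if i + 1 < n ∧ imgA images (i + 1) j = 1 then
            unionB d (findB d (fuelB n m) (i * m + j)) (findB d (fuelB n m) ((i + 1) * m + j)) else d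
        if j + 1 < m ∧ imgA images i (j + 1) = 1 then
            unionB d1 (findB d1 (fuelB n m) (i * m + j)) (findB d1 (fuelB n m) (i * m + j + 1)) else d1
      else d) i j := by
  by_cases hic : imgA images i j = 1
  · rw [if_pos hic]
    have hdij : domP n m (valF images) (i * m + j) := domP_cell n m images i j hic hi0 hin hj0 hjm
    -- first (down) union
    by_cases hg1 : i + 1 < n ∧ imgA images (i + 1) j = 1
    case pos =>
      have hddown : domP n m (valF images) ((i + 1) * m + j) :=
        ⟨(i + 1, j), ok_cell n m images (i + 1) j hg1.2 (by omega) hg1.1 hj0 hjm, by simp [idxc]⟩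
      have hcdown : connP n m (valF images) (i * m + j) ((i + 1) * m + j) := by
        refine ⟨(i, j), (i + 1, j), ok_cell n m images i j hic hi0 hin hj0 hjm,
          ok_cell n m images (i + 1) j hg1.2 (by omega) hg1.1 hj0 hjm, rfl, by simp [idxc], ?_⟩
        apply Relation.ReflTransGen.single
        refine ⟨ok_cell n m images i j hic hi0 hin hj0 hjm,
          ok_cell n m images (i + 1) j hg1.2 (by omega) hg1.1 hj0 hjm, ?_⟩
        simp [moveA]
      obtain ⟨hInv1, hpres1, heq1⟩ :=
        unionB_spec n m (valF images) d hInv (i * m + j) ((i + 1) * m + j) hdij hddown hcdown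
      -- second (right) union
      by_cases hg2 : j + 1 < m ∧ imgA images i (j + 1) = 1
      case pos =>
        have hdright : domP n m (valF images) (i * m + j + 1) :=
          ⟨(i, j + 1), ok_cell n m images i (j + 1) hg2.2 hi0 hin (by omega) hg2.1, by
            simp [idxc]; ring⟩
        have hcright : connP n m (valF images) (i * m + j) (i * m + j + 1) := by
          refine ⟨(i, j), (i, j + 1), ok_cell n m images i j hic hi0 hin hj0 hjm,
            ok_cell n m images i (j + 1) hg2.2 hi0 hin (by omega) hg2.1, rfl, by
              simp [idxc]; ring, ?_⟩
          apply Relation.ReflTransGen.single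
          refine ⟨ok_cell n m images i j hic hi0 hin hj0 hjm,
            ok_cell n m images i (j + 1) hg2.2 hi0 hin (by omega) hg2.1, ?_⟩
          simp [moveA]
        obtain ⟨hInv2, hpres2, heq2⟩ :=
          unionB_spec n m (valF images)
            (unionB d (findB d (fuelB n m) (i * m + j)) (findB d (fuelB n m) ((i + 1) * m + j)))
            hInv1 (i * m + j) (i * m + j + 1) hdij hdright hcright
        simp only [if_pos hg1, if_pos hg2]
        refine ⟨hInv2, presR_trans n m (valF images) _ _ _ hpres1 hpres2, ?_⟩
        intro _ _ _ _ _
        exact ⟨fun _ _ => hpres2 _ _ hdij hddown heq1, fun _ _ => heq2⟩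
      case neg =>
        simp only [if_pos hg1, if_neg hg2]
        refine ⟨hInv1, hpres1, ?_⟩
        intro _ _ _ _ _
        refine ⟨fun _ _ => heq1, fun hj1 himg1 => absurd ⟨hj1, himg1⟩ hg2⟩
    case neg =>
      by_cases hg2 : j + 1 < m ∧ imgA images i (j + 1) = 1
      case pos =>
        have hdright : domP n m (valF images) (i * m + j + 1) :=
          ⟨(i, j + 1), ok_cell n m images i (j + 1) hg2.2 hi0 hin (by omega) hg2.1, by
            simp [idxc]; ring⟩
        have hcright : connP n m (valF images) (i * m + j) (i * m + j + 1) := by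
          refine ⟨(i, j), (i, j + 1), ok_cell n m images i j hic hi0 hin hj0 hjm,
            ok_cell n m images i (j + 1) hg2.2 hi0 hin (by omega) hg2.1, rfl, by
              simp [idxc]; ring, ?_⟩
          apply Relation.ReflTransGen.single
          refine ⟨ok_cell n m images i j hic hi0 hin hj0 hjm,
            ok_cell n m images i (j + 1) hg2.2 hi0 hin (by omega) hg2.1, ?_⟩
          simp [moveA]
        obtain ⟨hInv2, hpres2, heq2⟩ :=
          unionB_spec n m (valF images) d hInv (i * m + j) (i * m + j + 1) hdij hdright hcright
        simp only [if_neg hg1, if_pos hg2]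
        refine ⟨hInv2, hpres2, ?_⟩
        intro _ _ _ _ _
        refine ⟨fun hi1 himg1 => absurd ⟨hi1, himg1⟩ hg1, fun _ _ => heq2⟩
      case neg =>
        simp only [if_neg hg1, if_neg hg2]
        refine ⟨hInv, presR_refl n m (valF images) d, ?_⟩
        intro _ _ _ _ _
        exact ⟨fun hi1 himg1 => absurd ⟨hi1, himg1⟩ hg1,
          fun hj1 himg1 => absurd ⟨hj1, himg1⟩ hg2⟩
  · rw [if_neg hic]
    refine ⟨hInv, presR_refl n m (valF images) d, ?_⟩
    intro h1
    exact absurd h1 hic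

theorem innerU (n m : Int) (images : List (List Int)) (i : Int)
    (hi0 : 0 ≤ i) (hin : i < n) :
    ∀ (js : List Int), (∀ j ∈ js, 0 ≤ j ∧ j < m) →
    ∀ (d : PySem.Dict Int Int), PInvP n m (valF images) d →
      PInvP n m (valF images)
        (js.foldl (fun (d : PySem.Dict Int Int) j =>
          if imgA images i j = 1 then
            let d1 := if i + 1 < n ∧ imgA images (i + 1) j = 1 then
                unionB d (findB d (fuelB n m) (i * m + j)) (findB d (fuelB n m) ((i + 1) * m + j)) else d
            if j + 1 < m ∧ imgA images i (j + 1) = 1 then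
                unionB d1 (findB d1 (fuelB n m) (i * m + j)) (findB d1 (fuelB n m) (i * m + j + 1)) else d1
          else d) d) ∧
      PresR n m (valF images) d
        (js.foldl (fun (d : PySem.Dict Int Int) j =>
          if imgA images i j = 1 then
            let d1 := if i + 1 < n ∧ imgA images (i + 1) j = 1 then
                unionB d (findB d (fuelB n m) (i * m + j)) (findB d (fuelB n m) ((i + 1) * m + j)) else d
            if j + 1 < m ∧ imgA images i (j + 1) = 1 then
                unionB d1 (findB d1 (fuelB n m) (i * m + j)) (findB d1 (fuelB n m) (i * m + j + 1)) else d1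
          else d) d) ∧
      (∀ j ∈ js, EAt n m images
        (js.foldl (fun (d : PySem.Dict Int Int) j =>
          if imgA images i j = 1 then
            let d1 := if i + 1 < n ∧ imgA images (i + 1) j = 1 then
                unionB d (findB d (fuelB n m) (i * m + j)) (findB d (fuelB n m) ((i + 1) * m + j)) else d
            if j + 1 < m ∧ imgA images i (j + 1) = 1 then
                unionB d1 (findB d1 (fuelB n m) (i * m + j)) (findB d1 (fuelB n m) (i * m + j + 1)) else d1
          else d) d) i j) := by
  intro js
  induction js with
  | nil =>
    intro _ d h
    exact ⟨h, presR_refl n m (valF images) d, by simp⟩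
  | cons j t ih =>
    intro hjs d h
    have hj := hjs j (by simp)
    obtain ⟨h1, hpres1, hEat1⟩ := cellU n m images i j hi0 hin hj.1 hj.2 d h
    obtain ⟨h', hpres', hEat'⟩ :=
      ih (fun j' hj' => hjs j' (List.mem_cons_of_mem _ hj')) _ h1
    simp only [List.foldl_cons]
    refine ⟨h', presR_trans n m (valF images) _ _ _ hpres1 hpres', ?_⟩
    intro j' hj'
    rcases List.mem_cons.mp hj' with h'' | h''
    · subst h''
      exact EAt_mono n m images _ _ hpres' i j' hEat1
    · exact hEat' j' h''

theorem outerU (n m : Int) (images : List (List Int)) :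
    ∀ (is : List Int), (∀ i ∈ is, 0 ≤ i ∧ i < n) →
    ∀ (d : PySem.Dict Int Int), PInvP n m (valF images) d →
      PInvP n m (valF images)
        (is.foldl (fun d i =>
          (PySem.List.pyRange 0 m 1).foldl (fun (d : PySem.Dict Int Int) j =>
            if imgA images i j = 1 then
              let d1 := if i + 1 < n ∧ imgA images (i + 1) j = 1 then
                  unionB d (findB d (fuelB n m) (i * m + j)) (findB d (fuelB n m) ((i + 1) * m + j)) else d
              if j + 1 < m ∧ imgA images i (j + 1) = 1 then
                  unionB d1 (findB d1 (fuelB n m) (i * m + j)) (findB d1 (fuelB n m) (i * m + j + 1)) else d1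
            else d) d) d) ∧
      PresR n m (valF images) d
        (is.foldl (fun d i =>
          (PySem.List.pyRange 0 m 1).foldl (fun (d : PySem.Dict Int Int) j =>
            if imgA images i j = 1 then
              let d1 := if i + 1 < n ∧ imgA images (i + 1) j = 1 then
                  unionB d (findB d (fuelB n m) (i * m + j)) (findB d (fuelB n m) ((i + 1) * m + j)) else d
              if j + 1 < m ∧ imgA images i (j + 1) = 1 then
                  unionB d1 (findB d1 (fuelB n m) (i * m + j)) (findB d1 (fuelB n m) (i * m + j + 1)) else d1
            else d) d) d) ∧
      (∀ i ∈ is, ∀ j ∈ PySem.List.pyRange 0 m 1, EAt n m images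
        (is.foldl (fun d i =>
          (PySem.List.pyRange 0 m 1).foldl (fun (d : PySem.Dict Int Int) j =>
            if imgA images i j = 1 then
              let d1 := if i + 1 < n ∧ imgA images (i + 1) j = 1 then
                  unionB d (findB d (fuelB n m) (i * m + j)) (findB d (fuelB n m) ((i + 1) * m + j)) else d
              if j + 1 < m ∧ imgA images i (j + 1) = 1 then
                  unionB d1 (findB d1 (fuelB n m) (i * m + j)) (findB d1 (fuelB n m) (i * m + j + 1)) else d1
            else d) d) d) i j) := by
  intro is
  induction is with
  | nil =>
    intro _ d h
    exact ⟨h, presR_refl n m (valF images) d, by simp⟩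
  | cons i t ih =>
    intro his d h
    have hi := his i (by simp)
    obtain ⟨h1, hpres1, hEat1⟩ :=
      innerU n m images i hi.1 hi.2 (PySem.List.pyRange 0 m 1)
        (fun j hj => PySem.List.mem_pyRange_one.mp hj) d h
    obtain ⟨h', hpres', hEat'⟩ := ih (fun i' hi' => his i' (List.mem_cons_of_mem _ hi')) _ h1
    simp only [List.foldl_cons]
    refine ⟨h', presR_trans n m (valF images) _ _ _ hpres1 hpres', ?_⟩
    intro i' hi' j hjmem
    rcases List.mem_cons.mp hi' with h'' | h''
    · subst h''
      exact EAt_mono n m images _ _ hpres' i' j (hEat1 j hjmem)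
    · exact hEat' i' h'' j hjmem

-- initParent: the identity map on exactly the 1-cell indices
theorem innerI (n m : Int) (images : List (List Int)) (i : Int) :
    ∀ (js : List Int) (d : PySem.Dict Int Int),
      (d.keys.Nodup →
        (js.foldl (fun (d : PySem.Dict Int Int) j =>
          if imgA images i j = 1 then d.insert (i * m + j) (i * m + j) else d) d).keys.Nodup) ∧
      (∀ x, ((js.foldl (fun (d : PySem.Dict Int Int) j =>
          if imgA images i j = 1 then d.insert (i * m + j) (i * m + j) else d) d).get? x).isSome ↔
        (∃ j ∈ js, imgA images i j = 1 ∧ x = i * m + j) ∨ (d.get? x).isSome) ∧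
      (∀ x p, (js.foldl (fun (d : PySem.Dict Int Int) j =>
          if imgA images i j = 1 then d.insert (i * m + j) (i * m + j) else d) d).get? x = some p →
        p = x ∨ d.get? x = some p) := by
  intro js
  induction js with
  | nil =>
    intro d
    exact ⟨fun h => h, fun x => by simp, fun x p h => Or.inr h⟩
  | cons j t ih =>
    intro d
    simp only [List.foldl_cons]
    by_cases hc : imgA images i j = 1
    · rw [if_pos hc]
      obtain ⟨ihnd, ihsome, ihval⟩ := ih (d.insert (i * m + j) (i * m + j))
      refine ⟨?_, ?_, ?_⟩
      · intro hnd
        exact ihnd (PySem.Dict.nodup_keys_insert d _ _ hnd)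
      · intro x
        rw [ihsome x, PySem.Dict.get?_insert]
        by_cases hx : x = i * m + j
        · constructor
          · intro _
            exact Or.inl ⟨j, by simp, hc, hx⟩
          · intro _
            refine Or.inr ?_
            rw [if_pos hx]
            rfl
        · rw [if_neg hx]
          constructor
          · rintro (⟨j', hj', hcc, hxx⟩ | hs)
            · exact Or.inl ⟨j', List.mem_cons_of_mem _ hj', hcc, hxx⟩
            · exact Or.inr hs
          · rintro (⟨j', hj', hcc, hxx⟩ | hs)
            · rcases List.mem_cons.mp hj' with h'' | h''
              · exact absurd (h'' ▸ hxx) hx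
              · exact Or.inl ⟨j', h'', hcc, hxx⟩
            · exact Or.inr hs
      · intro x p h
        rcases ihval x p h with h' | h'
        · exact Or.inl h'
        · rw [PySem.Dict.get?_insert] at h'
          by_cases hx : x = i * m + j
          · rw [if_pos hx] at h'
            injection h' with h'
            exact Or.inl (by rw [← h', hx])
          · rw [if_neg hx] at h'
            exact Or.inr h'
    · rw [if_neg hc]
      obtain ⟨ihnd, ihsome, ihval⟩ := ih d
      refine ⟨ihnd, ?_, ihval⟩
      intro x
      rw [ihsome x]
      constructor
      · rintro (⟨j', hj', hcc, hxx⟩ | hs)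
        · exact Or.inl ⟨j', List.mem_cons_of_mem _ hj', hcc, hxx⟩
        · exact Or.inr hs
      · rintro (⟨j', hj', hcc, hxx⟩ | hs)
        · rcases List.mem_cons.mp hj' with h'' | h''
          · exact absurd (h'' ▸ hcc) hc
          · exact Or.inl ⟨j', h'', hcc, hxx⟩
        · exact Or.inr hs

theorem outerI (n m : Int) (images : List (List Int)) :
    ∀ (is : List Int) (d : PySem.Dict Int Int),
      (d.keys.Nodup →
        (is.foldl (fun d i =>
          (PySem.List.pyRange 0 m 1).foldl (fun (d : PySem.Dict Int Int) j =>
            if imgA images i j = 1 then d.insert (i * m + j) (i * m + j) else d) d) d).keys.Nodup) ∧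
      (∀ x, ((is.foldl (fun d i =>
          (PySem.List.pyRange 0 m 1).foldl (fun (d : PySem.Dict Int Int) j =>
            if imgA images i j = 1 then d.insert (i * m + j) (i * m + j) else d) d) d).get? x).isSome ↔
        (∃ i ∈ is, ∃ j ∈ PySem.List.pyRange 0 m 1, imgA images i j = 1 ∧ x = i * m + j) ∨
          (d.get? x).isSome) ∧
      (∀ x p, (is.foldl (fun d i =>
          (PySem.List.pyRange 0 m 1).foldl (fun (d : PySem.Dict Int Int) j =>
            if imgA images i j = 1 then d.insert (i * m + j) (i * m + j) else d) d) d).get? x = some p →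
        p = x ∨ d.get? x = some p) := by
  intro is
  induction is with
  | nil =>
    intro d
    exact ⟨fun h => h, fun x => by simp, fun x p h => Or.inr h⟩
  | cons i t ih =>
    intro d
    simp only [List.foldl_cons]
    obtain ⟨ihnd, ihsome, ihval⟩ := ih ((PySem.List.pyRange 0 m 1).foldl (fun (d : PySem.Dict Int Int) j =>
      if imgA images i j = 1 then d.insert (i * m + j) (i * m + j) else d) d)
    obtain ⟨innd, insome, inval⟩ := innerI n m images i (PySem.List.pyRange 0 m 1) d
    refine ⟨fun hnd => ihnd (innd hnd), ?_, ?_⟩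
    · intro x
      rw [ihsome x, insome x]
      constructor
      · rintro (⟨i', hi', j', hj', hcc, hxx⟩ | (⟨j', hj', hcc, hxx⟩ | hs))
        · exact Or.inl ⟨i', List.mem_cons_of_mem _ hi', j', hj', hcc, hxx⟩
        · exact Or.inl ⟨i, by simp, j', hj', hcc, hxx⟩
        · exact Or.inr hs
      · rintro (⟨i', hi', j', hj', hcc, hxx⟩ | hs)
        · rcases List.mem_cons.mp hi' with h'' | h''
          · subst h''
            exact Or.inr (Or.inl ⟨j', hj', hcc, hxx⟩)
          · exact Or.inl ⟨i', h'', j', hj', hcc, hxx⟩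
        · exact Or.inr (Or.inr hs)
    · intro x p h
      rcases ihval x p h with h' | h'
      · exact Or.inl h'
      · rcases inval x p h' with h'' | h''
        · exact Or.inl h''
        · exact Or.inr h''

theorem initParent_PInv (n m : Int) (images : List (List Int)) :
    PInvP n m (valF images) (initParent n m images) := by
  obtain ⟨hnd, hsome, hval⟩ := outerI n m images (PySem.List.pyRange 0 n 1) PySem.Dict.empty
  have hdomiff : ∀ x, ((initParent n m images).get? x).isSome ↔ domP n m (valF images) x := by
    intro x
    unfold initParent
    rw [hsome x]
    simp only [PySem.Dict.get?_empty, Option.isSome_none, Bool.false_eq_true, or_false]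
    constructor
    · rintro ⟨i, hi, j, hj, hcc, hxx⟩
      obtain ⟨hi0, hin⟩ := PySem.List.mem_pyRange_one.mp hi
      obtain ⟨hj0, hjm⟩ := PySem.List.mem_pyRange_one.mp hj
      exact hxx ▸ domP_cell n m images i j hcc hi0 hin hj0 hjm
    · rintro ⟨c, hok, rfl⟩
      obtain ⟨⟨h1, h2, h3, h4⟩, h5⟩ := hok
      exact ⟨c.1, PySem.List.mem_pyRange_one.mpr ⟨h1, h2⟩, c.2,
        PySem.List.mem_pyRange_one.mpr ⟨h3, h4⟩, h5, rfl⟩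
  refine ⟨hnd (by rw [PySem.Dict.keys_empty]; exact List.nodup_nil), hdomiff, ?_⟩
  intro x p h
  rcases hval x p h with h' | h'
  · subst h'
    refine ⟨le_refl _, connP_refl n m (valF images) p ?_⟩
    exact (hdomiff p).mp (by rw [h]; rfl)
  · rw [PySem.Dict.get?_empty] at h'
    cases h'

-- ---------- the scanned parent: all edges unified ----------
theorem parentF_facts (n m : Int) (images : List (List Int)) :
    PInvP n m (valF images) (unionScan n m images (initParent n m images)) ∧
    (∀ i ∈ PySem.List.pyRange 0 n 1, ∀ j ∈ PySem.List.pyRange 0 m 1,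
      EAt n m images (unionScan n m images (initParent n m images)) i j) := by
  unfold unionScan
  obtain ⟨h1, _, h3⟩ := outerU n m images (PySem.List.pyRange 0 n 1)
    (fun i hi => PySem.List.mem_pyRange_one.mp hi)
    (initParent n m images) (initParent_PInv n m images)
  exact ⟨h1, h3⟩

theorem edge_root (n m : Int) (images : List (List Int)) (P : PySem.Dict Int Int)
    (hE : ∀ i ∈ PySem.List.pyRange 0 n 1, ∀ j ∈ PySem.List.pyRange 0 m 1, EAt n m images P i j)
    (c c' : Int × Int) (he : edgeC n m (valF images) c c') :
    rootP n m P (idxc m c) = rootP n m P (idxc m c') := by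
  obtain ⟨⟨⟨hc1, hc2, hc3, hc4⟩, hcv⟩, ⟨⟨hd1, hd2, hd3, hd4⟩, hdv⟩, hmv⟩ := he
  have hEc := hE c.1 (PySem.List.mem_pyRange_one.mpr ⟨hc1, hc2⟩) c.2
    (PySem.List.mem_pyRange_one.mpr ⟨hc3, hc4⟩)
  have hEd := hE c'.1 (PySem.List.mem_pyRange_one.mpr ⟨hd1, hd2⟩) c'.2
    (PySem.List.mem_pyRange_one.mpr ⟨hd3, hd4⟩)
  simp only [moveA, List.mem_cons, Prod.mk.injEq, List.not_mem_nil, or_false] at hmv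
  have hcv' : imgA images c.1 c.2 = 1 := hcv
  have hdv' : imgA images c'.1 c'.2 = 1 := hdv
  rcases hmv with ⟨e1, e2⟩ | ⟨e1, e2⟩ | ⟨e1, e2⟩ | ⟨e1, e2⟩
  · -- c' = (c.1, c.2 + 1) : right edge at c
    have h1 : c'.1 = c.1 := by omega
    have h2 : c'.2 = c.2 + 1 := by omega
    have hgoal := (hEc hcv' hc1 hc2 hc3 hc4).2 (by omega)
      (by rw [← h1, ← h2]; exact hdv')
    have hidx : idxc m c' = c.1 * m + c.2 + 1 := by
      simp only [idxc, h1, h2]; ring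
    rw [show idxc m c = c.1 * m + c.2 from rfl, hidx]
    exact hgoal
  · -- c' = (c.1, c.2 - 1) : right edge at c'
    have h1 : c.1 = c'.1 := by omega
    have h2 : c.2 = c'.2 + 1 := by omega
    have hgoal := (hEd hdv' hd1 hd2 hd3 hd4).2 (by omega)
      (by rw [← h1, ← h2]; exact hcv')
    have hidx : idxc m c = c'.1 * m + c'.2 + 1 := by
      simp only [idxc, h1, h2]; ring
    rw [show idxc m c' = c'.1 * m + c'.2 from rfl, hidx]
    exact hgoal.symm
  · -- c' = (c.1 + 1, c.2) : down edge at c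
    have h1 : c'.1 = c.1 + 1 := by omega
    have h2 : c'.2 = c.2 := by omega
    have hgoal := (hEc hcv' hc1 hc2 hc3 hc4).1 (by omega)
      (by rw [← h1, ← h2]; exact hdv')
    have hidx : idxc m c' = (c.1 + 1) * m + c.2 := by
      simp only [idxc, h1, h2]
    rw [show idxc m c = c.1 * m + c.2 from rfl, hidx]
    exact hgoal
  · -- c' = (c.1 - 1, c.2) : down edge at c'
    have h1 : c.1 = c'.1 + 1 := by omega
    have h2 : c.2 = c'.2 := by omega
    have hgoal := (hEd hdv' hd1 hd2 hd3 hd4).1 (by omega)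
      (by rw [← h1, ← h2]; exact hcv')
    have hidx : idxc m c = (c'.1 + 1) * m + c'.2 := by
      simp only [idxc, h1, h2]
    rw [show idxc m c' = c'.1 * m + c'.2 from rfl, hidx]
    exact hgoal.symm

theorem reach_root (n m : Int) (images : List (List Int)) (P : PySem.Dict Int Int)
    (hE : ∀ i ∈ PySem.List.pyRange 0 n 1, ∀ j ∈ PySem.List.pyRange 0 m 1, EAt n m images P i j)
    (c d : Int × Int) (h : reachC n m (valF images) c d) :
    rootP n m P (idxc m c) = rootP n m P (idxc m d) := by
  induction h with
  | refl => rfl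
  | tail _ h2 ih => exact ih.trans (edge_root n m images P hE _ _ h2)

theorem root_iff_conn (n m : Int) (images : List (List Int)) (P : PySem.Dict Int Int)
    (hInv : PInvP n m (valF images) P)
    (hE : ∀ i ∈ PySem.List.pyRange 0 n 1, ∀ j ∈ PySem.List.pyRange 0 m 1, EAt n m images P i j)
    (c d : Int × Int) (hc : okC n m (valF images) c) (hd : okC n m (valF images) d) :
    rootP n m P (idxc m c) = rootP n m P (idxc m d) ↔ reachC n m (valF images) c d := by
  constructor
  · intro h
    have hdc : domP n m (valF images) (idxc m c) := ⟨c, hc, rfl⟩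
    have hdd : domP n m (valF images) (idxc m d) := ⟨d, hd, rfl⟩
    have h1 := (find_props n m (valF images) P hInv (idxc m c).toNat (idxc m c) hdc le_rfl).2.1
    have h2 := (find_props n m (valF images) P hInv (idxc m d).toNat (idxc m d) hdd le_rfl).2.1
    have hcp : connP n m (valF images) (idxc m c) (idxc m d) :=
      connP_trans n m (valF images) _ _ _ (h ▸ h1)
        (connP_symm n m (valF images) _ _ h2)
    obtain ⟨c₀, d₀, hc₀, hd₀, hic, hid, hr⟩ := hcp
    have hcc : c₀ = c := idxc_inj n m c₀ c hc₀.1 hc.1 (by rw [hic])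
    have hdd' : d₀ = d := idxc_inj n m d₀ d hd₀.1 hd.1 (by rw [hid])
    rw [← hcc, ← hdd']
    exact hr
  · exact reach_root n m images P hE c d

-- ---------- the list of 1-cells in scan order ----------
def okListB (n m : Int) (images : List (List Int)) : List (Int × Int) :=
  (PySem.List.pyRange 0 n 1).flatMap (fun i =>
    (PySem.List.pyRange 0 m 1).filterMap (fun j =>
      if imgA images i j = 1 then some (i, j) else none))

theorem mem_okListB (n m : Int) (images : List (List Int)) (c : Int × Int) :
    c ∈ okListB n m images ↔ okC n m (valF images) c := by
  simp only [okListB, List.mem_flatMap, List.mem_filterMap]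
  constructor
  · rintro ⟨i, hi, j, hj, hcc⟩
    obtain ⟨hi0, hin⟩ := PySem.List.mem_pyRange_one.mp hi
    obtain ⟨hj0, hjm⟩ := PySem.List.mem_pyRange_one.mp hj
    by_cases hv : imgA images i j = 1
    · rw [if_pos hv] at hcc
      injection hcc with hcc
      rw [← hcc]
      exact ok_cell n m images i j hv hi0 hin hj0 hjm
    · rw [if_neg hv] at hcc
      cases hcc
  · rintro ⟨⟨h1, h2, h3, h4⟩, h5⟩
    exact ⟨c.1, PySem.List.mem_pyRange_one.mpr ⟨h1, h2⟩, c.2,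
      PySem.List.mem_pyRange_one.mpr ⟨h3, h4⟩, by
        rw [if_pos (show imgA images c.1 c.2 = 1 from h5)]⟩

theorem nodup_okListB (n m : Int) (images : List (List Int)) :
    (okListB n m images).Nodup := by
  have hrow : ∀ i : Int, ((PySem.List.pyRange 0 m 1).filterMap (fun j =>
      if imgA images i j = 1 then some ((i : Int), j) else none)).Nodup := by
    intro i
    apply List.Nodup.filterMap
    · intro a a' b hb hb'
      by_cases ha : imgA images i a = 1
      · rw [if_pos ha] at hb
        simp only [Option.mem_def, Option.some_inj] at hb
        by_cases ha' : imgA images i a' = 1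
        · rw [if_pos ha'] at hb'
          simp only [Option.mem_def, Option.some_inj] at hb'
          rw [← hb'] at hb
          injection hb with h1 h2
        · rw [if_neg ha'] at hb'
          cases hb'
      · rw [if_neg ha] at hb
        cases hb
    · exact PySem.List.nodup_pyRange_one 0 m
  have hfst : ∀ (i : Int) (c : Int × Int),
      c ∈ (PySem.List.pyRange 0 m 1).filterMap (fun j =>
        if imgA images i j = 1 then some ((i : Int), j) else none) → c.1 = i := by
    intro i c hc
    obtain ⟨j, _, hj⟩ := List.mem_filterMap.mp hc
    by_cases hv : imgA images i j = 1
    · rw [if_pos hv] at hj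
      injection hj with hj
      rw [← hj]
    · rw [if_neg hv] at hj
      cases hj
  have key : ∀ (l : List Int), l.Nodup →
      (l.flatMap (fun i => (PySem.List.pyRange 0 m 1).filterMap (fun j =>
        if imgA images i j = 1 then some ((i : Int), j) else none))).Nodup := by
    intro l
    induction l with
    | nil => intro _; exact List.nodup_nil
    | cons i t ih =>
      intro hnd
      obtain ⟨hit, hndt⟩ := List.nodup_cons.mp hnd
      rw [List.flatMap_cons, List.nodup_append]
      refine ⟨hrow i, ih hndt, ?_⟩
      intro a ha b hb heq
      subst heq
      obtain ⟨i', hi', hbmem⟩ := List.mem_flatMap.mp hb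
      have h1 := hfst i a ha
      have h2 := hfst i' a hbmem
      have hii : i = i' := by rw [← h1]; exact h2
      exact hit (hii ▸ hi')
  exact key (PySem.List.pyRange 0 n 1) (PySem.List.nodup_pyRange_one 0 n)

-- ---------- tallyB as a counting fold over the root list ----------
theorem innerT (n m : Int) (images : List (List Int)) (P : PySem.Dict Int Int) (i : Int) :
    ∀ (js : List Int) (d : PySem.Dict Int Int),
      js.foldl (fun (s : PySem.Dict Int Int) j =>
        if imgA images i j = 1 then
          s.insert (findB P (fuelB n m) (i * m + j))
            (s.getD (findB P (fuelB n m) (i * m + j)) 0 + 1)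
        else s) d =
      ((js.filterMap (fun j => if imgA images i j = 1 then some ((i : Int), j) else none)).map
        (fun c => rootP n m P (idxc m c))).foldl
        (fun (d : PySem.Dict Int Int) x => d.insert x (d.getD x 0 + 1)) d := by
  intro js
  induction js with
  | nil => intro d; rfl
  | cons j t ih =>
    intro d
    simp only [List.foldl_cons, List.filterMap_cons]
    by_cases hv : imgA images i j = 1
    · rw [if_pos hv, if_pos hv]
      simp only [List.map_cons, List.foldl_cons]
      exact ih _
    · rw [if_neg hv, if_neg hv]
      exact ih d

theorem tallyB_eq (n m : Int) (images : List (List Int)) (P : PySem.Dict Int Int) :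
    tallyB n m images P =
      ((okListB n m images).map (fun c => rootP n m P (idxc m c))).foldl
        (fun (d : PySem.Dict Int Int) x => d.insert x (d.getD x 0 + 1)) PySem.Dict.empty := by
  unfold tallyB okListB
  have key : ∀ (l : List Int) (d : PySem.Dict Int Int),
      l.foldl (fun s i =>
        (PySem.List.pyRange 0 m 1).foldl (fun (s : PySem.Dict Int Int) j =>
          if imgA images i j = 1 then
            s.insert (findB P (fuelB n m) (i * m + j))
              (s.getD (findB P (fuelB n m) (i * m + j)) 0 + 1)
          else s) s) d =
      ((l.flatMap (fun i => (PySem.List.pyRange 0 m 1).filterMap (fun j =>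
        if imgA images i j = 1 then some ((i : Int), j) else none))).map
        (fun c => rootP n m P (idxc m c))).foldl
        (fun (d : PySem.Dict Int Int) x => d.insert x (d.getD x 0 + 1)) d := by
    intro l
    induction l with
    | nil => intro d; rfl
    | cons i t ih =>
      intro d
      simp only [List.foldl_cons, List.flatMap_cons, List.map_append, List.foldl_append]
      rw [innerT n m images P i (PySem.List.pyRange 0 m 1) d]
      exact ih _
  exact key (PySem.List.pyRange 0 n 1) PySem.Dict.empty


-- ---------- representatives of the root-kernel ----------
theorem reps_exists (f : (Int × Int) → Int) (g : (Int × Int) → Finset (Int × Int))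
    (l0 : List (Int × Int))
    (hker : ∀ a b, a ∈ l0 → b ∈ l0 → (f a = f b ↔ g a = g b)) :
    ∀ (l : List (Int × Int)), (∀ a ∈ l, a ∈ l0) →
    ∀ (reps : List (Int × Int)), (∀ r ∈ reps, r ∈ l0) → (reps.map g).Nodup →
    ∃ reps', (∀ r ∈ reps', r ∈ l) ∧
      (l.map f).foldl PySem.Set.add (reps.map f) = (reps ++ reps').map f ∧
      ((reps ++ reps').map g).Nodup ∧
      (∀ a ∈ l, ∃ r ∈ reps ++ reps', g a = g r) := by
  intro l
  induction l with
  | nil =>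
    intro _ reps _ hnd
    exact ⟨[], by simp, by simp, by simpa using hnd, by simp⟩
  | cons a t ih =>
    intro hl reps hreps hnd
    have ha0 : a ∈ l0 := hl a (by simp)
    simp only [List.map_cons, List.foldl_cons]
    by_cases hmem : f a ∈ reps.map f
    · rw [PySem.Set.add_of_mem hmem]
      obtain ⟨reps', hsub, heq, hnd', hcov⟩ :=
        ih (fun x hx => hl x (List.mem_cons_of_mem _ hx)) reps hreps hnd
      refine ⟨reps', fun r hr => List.mem_cons_of_mem _ (hsub r hr), heq, hnd', ?_⟩
      intro x hx
      rcases List.mem_cons.mp hx with h' | h'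
      · subst h'
        obtain ⟨r, hr, hfr⟩ := List.mem_map.mp hmem
        exact ⟨r, List.mem_append.mpr (Or.inl hr),
          ((hker r x (hreps r hr) ha0).mp hfr).symm⟩
      · exact hcov x h'
    · rw [PySem.Set.add_of_not_mem hmem]
      have hrw : reps.map f ++ [f a] = (reps ++ [a]).map f := by simp
      rw [hrw]
      have hreps1 : ∀ r ∈ reps ++ [a], r ∈ l0 := by
        intro r hr
        rcases List.mem_append.mp hr with h' | h'
        · exact hreps r h'
        · simp only [List.mem_singleton] at h'; subst h'; exact ha0
      have hnd1 : ((reps ++ [a]).map g).Nodup := by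
        rw [List.map_append, List.nodup_append]
        refine ⟨hnd, by simp, ?_⟩
        intro x hx y hy
        simp only [List.map_cons, List.map_nil, List.mem_singleton] at hy
        subst hy
        obtain ⟨r, hr, hgr⟩ := List.mem_map.mp hx
        intro hxy
        subst hxy
        exact hmem (List.mem_map.mpr ⟨r, hr,
          (hker r a (hreps r hr) ha0).mpr hgr⟩)
      obtain ⟨reps'', hsub, heq, hnd', hcov⟩ :=
        ih (fun x hx => hl x (List.mem_cons_of_mem _ hx)) (reps ++ [a]) hreps1 hnd1
      have hassoc : (reps ++ [a]) ++ reps'' = reps ++ (a :: reps'') := by simp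
      rw [hassoc] at heq hnd' hcov
      refine ⟨a :: reps'', ?_, heq, hnd', ?_⟩
      · intro r hr
        rcases List.mem_cons.mp hr with h' | h'
        · subst h'; simp
        · exact List.mem_cons_of_mem _ (hsub r h')
      · intro x hx
        rcases List.mem_cons.mp hx with h' | h'
        · subst h'
          exact ⟨x, List.mem_append.mpr (Or.inr (by simp)), rfl⟩
        · exact hcov x h'

-- ---------- multiplicity of a root = component size ----------
theorem count_card (n m : Int) (images : List (List Int)) (P : PySem.Dict Int Int)
    (hInv : PInvP n m (valF images) P)
    (hE : ∀ i ∈ PySem.List.pyRange 0 n 1, ∀ j ∈ PySem.List.pyRange 0 m 1, EAt n m images P i j)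
    (r : Int × Int) (hr : okC n m (valF images) r) :
    ((okListB n m images).map (fun c => rootP n m P (idxc m c))).count
      (rootP n m P (idxc m r)) = (compC n m (valF images) r).card := by
  rw [List.count_eq_countP, List.countP_map]
  have hcp : (okListB n m images).countP
      ((fun a => a == rootP n m P (idxc m r)) ∘ (fun c => rootP n m P (idxc m c))) =
      ((okListB n m images).filter
        ((fun a => a == rootP n m P (idxc m r)) ∘ (fun c => rootP n m P (idxc m c)))).length :=
    List.countP_eq_length_filter
  rw [hcp]
  have hndf : ((okListB n m images).filter
      ((fun a => a == rootP n m P (idxc m r)) ∘ (fun c => rootP n m P (idxc m c)))).Nodup :=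
    List.Nodup.filter _ (nodup_okListB n m images)
  rw [← List.toFinset_card_of_nodup hndf]
  congr 1
  apply Finset.ext
  intro x
  rw [List.mem_toFinset, List.mem_filter, mem_okListB, mem_compC]
  simp only [Function.comp_apply, beq_iff_eq]
  constructor
  · rintro ⟨hok, hroot⟩
    have := (root_iff_conn n m images P hInv hE x r hok hr).mp hroot
    exact ⟨hok.1, reach_symm n m (valF images) _ _ this⟩
  · rintro ⟨hinb, hrx⟩
    have hok : okC n m (valF images) x := reach_ok n m (valF images) r x hr hrx
    exact ⟨hok, (root_iff_conn n m images P hInv hE x r hok hr).mpr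
      (reach_symm n m (valF images) _ _ hrx)⟩

theorem maxD_pos (l : List Int) (h : ∀ k ∈ l, 1 ≤ k) :
    PySem.List.maxD l (fun x => x) 0 = l.foldl max 0 := by
  cases l with
  | nil => rfl
  | cons a t =>
    simp only [PySem.List.maxD, PySem.List.max?_id_cons, Option.getD_some, List.foldl_cons]
    have ha : max 0 a = a := max_eq_right (by have := h a (by simp); omega)
    rw [ha]

theorem solution_B_char' (n m : Int) (images : List (List Int)) :
    CharL n m (valF images) (solution_alt n m images) := by
  obtain ⟨hInv, hE⟩ := parentF_facts n m images
  have hker : ∀ a b, a ∈ okListB n m images → b ∈ okListB n m images →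
      ((fun c => rootP n m (unionScan n m images (initParent n m images)) (idxc m c)) a =
       (fun c => rootP n m (unionScan n m images (initParent n m images)) (idxc m c)) b ↔
       compC n m (valF images) a = compC n m (valF images) b) := by
    intro a b ha hb
    rw [mem_okListB] at ha hb
    rw [root_iff_conn n m images _ hInv hE a b ha hb]
    constructor
    · exact comp_congr n m (valF images) a b
    · intro h
      have : b ∈ compC n m (valF images) a := by
        rw [h]; exact self_mem_comp n m (valF images) b hb
      exact (mem_compC n m (valF images) a b).mp this |>.2
  obtain ⟨reps, hsub, heq, hnd, hcov⟩ :=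
    reps_exists (fun c => rootP n m (unionScan n m images (initParent n m images)) (idxc m c))
      (compC n m (valF images)) (okListB n m images) hker (okListB n m images)
      (fun a ha => ha) [] (by simp) (by simp)
  simp only [List.nil_append] at heq hnd hcov
  -- facts about the tally dict
  have htally := tallyB_eq n m images (unionScan n m images (initParent n m images))
  have hkeys : (tallyB n m images (unionScan n m images (initParent n m images))).keys =
      reps.map (fun c => rootP n m (unionScan n m images (initParent n m images)) (idxc m c)) := by
    rw [htally, PySem.Dict.keys_foldl_insert _ (fun d x => d.getD x 0 + 1) PySem.Dict.empty,
      PySem.Dict.keys_empty]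
    exact heq
  have hndk : (tallyB n m images (unionScan n m images (initParent n m images))).keys.Nodup := by
    rw [htally]
    exact PySem.Dict.nodup_keys_foldl_insert _ _ _ (by rw [PySem.Dict.keys_empty]; exact List.nodup_nil)
  have hgetD : ∀ r ∈ reps,
      (tallyB n m images (unionScan n m images (initParent n m images))).getD
        (rootP n m (unionScan n m images (initParent n m images)) (idxc m r)) 0 =
      ((compC n m (valF images) r).card : Int) := by
    intro r hr
    rw [htally, PySem.Dict.getD_foldl_insert_add_one, PySem.Dict.getD_empty, zero_add,
      count_card n m images _ hInv hE r ((mem_okListB n m images r).mp (hsub r hr))]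
  have hvalues : (tallyB n m images (unionScan n m images (initParent n m images))).values =
      reps.map (fun r => ((compC n m (valF images) r).card : Int)) := by
    rw [PySem.Dict.values_eq_map_keys _ hndk 0, hkeys, List.map_map]
    apply List.map_congr_left
    intro r hr
    exact hgetD r hr
  refine ⟨reps.map (compC n m (valF images)), hnd, ?_, ?_⟩
  · intro K
    constructor
    · intro hK
      obtain ⟨r, hr, hKr⟩ := List.mem_map.mp hK
      exact ⟨r, (mem_okListB n m images r).mp (hsub r hr), hKr.symm⟩
    · rintro ⟨c, hok, rfl⟩
      obtain ⟨r, hr, hgr⟩ := hcov c ((mem_okListB n m images c).mpr hok)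
      exact List.mem_map.mpr ⟨r, hr, hgr.symm⟩
  · simp only [solution_alt]
    refine Prod.ext ?_ ?_
    · show ((tallyB n m images (unionScan n m images (initParent n m images))).size : Int) = _
      have : (tallyB n m images (unionScan n m images (initParent n m images))).size =
          (tallyB n m images (unionScan n m images (initParent n m images))).keys.length := by
        simp [PySem.Dict.size, PySem.Dict.keys]
      rw [this, hkeys]
      simp
    · show PySem.List.maxD
        (tallyB n m images (unionScan n m images (initParent n m images))).values
        (fun x => x) 0 = _
      rw [hvalues]
      have hpos : ∀ k ∈ reps.map (fun r => ((compC n m (valF images) r).card : Int)), 1 ≤ k := by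
        intro k hk
        obtain ⟨r, hr, hkr⟩ := List.mem_map.mp hk
        have hok : okC n m (valF images) r := (mem_okListB n m images r).mp (hsub r hr)
        have : 0 < (compC n m (valF images) r).card :=
          Finset.card_pos.mpr ⟨r, self_mem_comp n m (valF images) r hok⟩
        omega
      rw [maxD_pos _ hpos]
      congr 1
      rw [List.map_map]
      rfl


theorem charL_unique (n m : Int) (val : Int × Int → Int) (o1 o2 : Int × Int)
    (h1 : CharL n m val o1) (h2 : CharL n m val o2) : o1 = o2 := by
  obtain ⟨L1, hnd1, hmem1, ho1⟩ := h1
  obtain ⟨L2, hnd2, hmem2, ho2⟩ := h2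
  have hperm : L1.Perm L2 := by
    apply List.perm_of_nodup_nodup_toFinset_eq hnd1 hnd2
    apply Finset.ext
    intro K
    rw [List.mem_toFinset, List.mem_toFinset, hmem1, hmem2]
  rw [ho1, ho2, hperm.length_eq,
    List.Perm.foldl_op_eq (l₁ := L1.map (fun K => (K.card : Int))) (hperm.map _)]

-- ===== VERDICT (by name: the statement is the Claim_ definition above) =====
theorem solution_spec : Claim_equal_solution := by
  intro n m images _ _
  exact charL_unique n m (valF images) _ _
    (solution_A_char' n m images) (solution_B_char' n m images)
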